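-- pv_equiv track=rewrite | github.com/jina0924/Algorithm | Programmers/Prev/Q2/s1.py | solution
-- ===== SOURCE A (Python) =====
-- from collections import deque
--
-- def solution(land):
--     n, m = len(land), len(land[0])
--     data = [0] * m
--     dr, dc = (-1, 1, 0, 0), (0, 0, -1, 1)
--
--
--     def bfs(r, c):
--         queue = deque([(r, c)])
--         land[r][c] = 0
--         cnt = 0
--         cols = set()
--
--         while queue:
--             cr, cc = queue.popleft()
--             cnt += 1
--             cols.add(cc)
--             for d in range(4):
--                 nr, nc = cr + dr[d], cc + dc[d]
--                 if 0 <= nr < n and 0 <= nc < m and land[nr][nc]: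
--                     land[nr][nc] = 0
--                     queue.append((nr, nc))
--
--         return cnt, cols
--
--
--     for r in range(n):
--         for c in range(m):
--             if land[r][c]:
--                 cnt, cols = bfs(r, c)
--                 for col in cols:
--                     data[col] += cnt
--
--     return max(data)
-- ===== SOURCE B (Python) =====
-- def solution(land):
--     n, m = len(land), len(land[0])
--     # connected-component labeling with union-by-global-relabel (no flood fill)
--     label = {}
--     for r in range(n):
--         for c in range(m):
--             if land[r][c]:
--                 label[(r, c)] = r * m + c
--                 if (r - 1, c) in label:
--                     label[(r, c)] = label[(r - 1, c)]
--                 if (r, c - 1) in label: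
--                     a, b = label[(r, c - 1)], label[(r, c)]
--                     if a != b:
--                         for k in label:
--                             if label[k] == b:
--                                 label[k] = a
--     groups = {}
--     for (r, c), lab in label.items():
--         if lab not in groups:
--             groups[lab] = (0, set())
--         cnt, cols = groups[lab]
--         cols.add(c)
--         groups[lab] = (cnt + 1, cols)
--     data = [0] * m
--     for cnt, cols in groups.values():
--         for col in cols:
--             data[col] += cnt
--     return max(data)
-- ===== Notes on version B (the rewrite author's own statement) =====
-- stated objective: alternative
-- what changed: The mutating BFS flood fill (deque per component, zeroing the grid) is replaced by connected-component labeling: one row-major pass assigns each land cell a label and merges labels with the up/left neighbours (union by global relabel, no queue/stack and no grid mutation), then a grouping pass aggregates per-label size and column set before filling the per-column totals.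
import Mathlib
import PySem

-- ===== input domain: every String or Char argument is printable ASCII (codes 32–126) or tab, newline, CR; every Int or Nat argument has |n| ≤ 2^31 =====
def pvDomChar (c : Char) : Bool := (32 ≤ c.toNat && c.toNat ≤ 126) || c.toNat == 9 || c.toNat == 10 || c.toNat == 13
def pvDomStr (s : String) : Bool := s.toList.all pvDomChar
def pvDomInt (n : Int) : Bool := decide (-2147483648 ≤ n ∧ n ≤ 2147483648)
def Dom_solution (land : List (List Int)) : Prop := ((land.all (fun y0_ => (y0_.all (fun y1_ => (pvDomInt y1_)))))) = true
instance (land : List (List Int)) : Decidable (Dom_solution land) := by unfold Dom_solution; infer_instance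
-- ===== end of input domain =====

-- One-line summary: B replaces A's grid-mutating BFS flood fill by connected-component labeling
-- (union by global relabel) plus a grouping pass; equivalence is about the RETURN value only
-- (Python A zeroes `land` in place, Python B does not mutate it).


-- ===== PORT A =====
-- `land[r][c]` / `land[r][c] = 0`; exact for the in-range indices at which the ports use them
-- (every access in both Pythons is guarded by `0 <= i < len`, or by Pre_solution for the outer scan).
def gRead (g : List (List Int)) (r c : Int) : Int :=
  (PySem.List.pyGet? ((PySem.List.pyGet? g r).getD []) c).getD 0

def gZero (g : List (List Int)) (r c : Int) : List (List Int) :=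
  PySem.List.pySetD g r (PySem.List.pySetD ((PySem.List.pyGet? g r).getD []) c 0)

-- body of A's `for d in range(4)` neighbour loop (dr = (-1,1,0,0), dc = (0,0,-1,1))
def stepA (n m cr cc : Int) (s : List (List Int) × List (Int × Int)) (d : Int) :
    List (List Int) × List (Int × Int) :=
  let nr := cr + PySem.List.pyGetD [-1, 1, 0, 0] d 0
  let nc := cc + PySem.List.pyGetD [0, 0, -1, 1] d 0
  if 0 ≤ nr ∧ nr < n ∧ 0 ≤ nc ∧ nc < m ∧ gRead s.1 nr nc ≠ 0 then
    (gZero s.1 nr nc, s.2 ++ [(nr, nc)])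
  else s

-- number of nonzero grid entries: termination measure for A's BFS loop
def gridNZ (g : List (List Int)) : Nat := (g.map (fun row => row.countP (fun v => v != 0))).sum

theorem pvSumSetLt {l : List Nat} {i : Nat} {a : Nat} (h : i < l.length) (ha : a < l[i]) :
    (l.set i a).sum < l.sum := by
  induction l generalizing i with
  | nil => simp at h
  | cons x t ih =>
    cases i with
    | zero => simpa using Nat.add_lt_add_right (by simpa using ha) t.sum
    | succ i =>
      have := ih (i := i) (by simpa using h) (by simpa using ha)
      simpa using Nat.add_lt_add_left this x

theorem pvCountPSetZero {row : List Int} {j : Nat} (h : j < row.length) (hv : row[j] ≠ 0) :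
    (row.set j 0).countP (fun v => v != 0) < row.countP (fun v => v != 0) := by
  induction row generalizing j with
  | nil => simp at h
  | cons x t ih =>
    cases j with
    | zero =>
      have hx : x ≠ 0 := by simpa using hv
      simp [hx]
    | succ j =>
      have := ih (j := j) (by simpa using h) (by simpa using hv)
      have hset : (x :: t).set (j + 1) 0 = x :: t.set j 0 := by simp
      rw [hset]
      simp only [List.countP_cons]
      omega

theorem gridNZ_gZero_lt (g : List (List Int)) (r c : Int) (hr : 0 ≤ r) (hc : 0 ≤ c)
    (h : gRead g r c ≠ 0) : gridNZ (gZero g r c) < gridNZ g := by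
  unfold gRead at h
  rw [PySem.List.pyGet?_of_nonneg _ hr] at h
  rcases hg : g[r.toNat]? with _ | row
  · rw [hg] at h; simp [PySem.List.pyGet?] at h
  rw [hg] at h
  simp only [Option.getD_some] at h
  have hi : r.toNat < g.length := (List.getElem?_eq_some_iff.mp hg).1
  rcases hrowv : row[c.toNat]? with _ | v
  · rw [PySem.List.pyGet?_of_nonneg _ hc, hrowv] at h; simp at h
  have hj : c.toNat < row.length := (List.getElem?_eq_some_iff.mp hrowv).1
  rw [PySem.List.pyGet?_of_nonneg _ hc, hrowv] at h
  simp only [Option.getD_some] at h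
  unfold gZero gridNZ
  rw [PySem.List.pyGet?_of_nonneg _ hr, hg]
  simp only [Option.getD_some]
  rw [PySem.List.pySetD_of_nonneg _ _ hc, PySem.List.pySetD_of_nonneg _ _ hr]
  rw [List.map_set]
  have hlen : r.toNat < (g.map (fun row => row.countP (fun v => v != 0))).length := by
    rw [List.length_map]; exact hi
  apply pvSumSetLt hlen
  have hrow : (g.map (fun row => row.countP (fun v => v != 0)))[r.toNat]'hlen =
      row.countP (fun v => v != 0) := by
    rw [List.getElem_map]
    congr 1
    exact List.getElem?_eq_some_iff.mp hg |>.2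
  rw [hrow]
  exact pvCountPSetZero hj (by rw [(List.getElem?_eq_some_iff.mp hrowv).2]; exact h)

theorem stepA_one (n m cr cc : Int) (d : Int) (s : List (List Int) × List (Int × Int)) :
    gridNZ (stepA n m cr cc s d).1 + (stepA n m cr cc s d).2.length ≤
      gridNZ s.1 + s.2.length := by
  unfold stepA
  dsimp only
  split
  · rename_i hcond
    obtain ⟨h1, _, h3, _, h5⟩ := hcond
    have := gridNZ_gZero_lt s.1 _ _ h1 h3 h5
    simp only [List.length_append, List.length_cons, List.length_nil]
    omega
  · omega

theorem stepA_measure (n m cr cc : Int) (l : List Int) (s : List (List Int) × List (Int × Int)) :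
    gridNZ (l.foldl (stepA n m cr cc) s).1 + (l.foldl (stepA n m cr cc) s).2.length ≤
      gridNZ s.1 + s.2.length := by
  induction l generalizing s with
  | nil => simp
  | cons d t ih =>
    simp only [List.foldl_cons]
    exact le_trans (ih _) (stepA_one n m cr cc d s)

-- A's `while queue:` loop
def bfsLoop (n m : Int) (g : List (List Int)) (q : List (Int × Int)) (cnt : Int)
    (cols : PySem.Set Int) : List (List Int) × Int × PySem.Set Int :=
  match q with
  | [] => (g, cnt, cols)
  | (cr, cc) :: rest =>
    let s := (PySem.List.pyRange 0 4 1).foldl (stepA n m cr cc) (g, rest)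
    bfsLoop n m s.1 s.2 (cnt + 1) (PySem.Set.add cols cc)
termination_by gridNZ g + q.length
decreasing_by
  have := stepA_measure n m cr cc (PySem.List.pyRange 0 4 1) (g, rest)
  have hq : ((cr, cc) :: rest).length = rest.length + 1 := rfl
  dsimp only at this ⊢
  omega

-- body of A's inner `for c in range(m)` loop
def cellA (n m : Int) (st : List (List Int) × List Int) (r c : Int) :
    List (List Int) × List Int :=
  if gRead st.1 r c ≠ 0 then
    let res := bfsLoop n m (gZero st.1 r c) [(r, c)] 0 PySem.Set.empty
    (res.1, (res.2.2).foldl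
      (fun d col => PySem.List.pySetD d col (PySem.List.pyGetD d col 0 + res.2.1)) st.2)
  else st

def solution (land : List (List Int)) : Int :=
  let n : Int := PySem.List.len land
  let m : Int := PySem.List.len ((PySem.List.pyGet? land 0).getD [])
  let data : List Int := PySem.List.pyRepeat [0] m
  let st := (PySem.List.pyRange 0 n 1).foldl (fun st r =>
      (PySem.List.pyRange 0 m 1).foldl (fun st c => cellA n m st r c) st) (land, data)
  (PySem.List.max? st.2 (fun x => x)).getD 0

-- ===== PORT B =====
-- `for k in label: if label[k] == b: label[k] = a` — a value overwrite keeps each entry's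
-- position and key, so the loop is exactly a map over the items list.
def relabel (d : PySem.Dict (Int × Int) Int) (b a : Int) : PySem.Dict (Int × Int) Int :=
  PySem.Dict.mk (d.items.map (fun p => if p.2 == b then (p.1, a) else p))

-- merge with the left neighbour: `if (r, c-1) in label: a, b = ...; if a != b: relabel`
-- (`label[(r-1,c)]` / `label[(r,c-1)]` are read only under the `in label` guard, so getD is exact)
def labLeft (d2 : PySem.Dict (Int × Int) Int) (r c : Int) : PySem.Dict (Int × Int) Int :=
  if d2.contains (r, c - 1) then
    if d2.getD (r, c - 1) 0 ≠ d2.getD (r, c) 0 then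
      relabel d2 (d2.getD (r, c) 0) (d2.getD (r, c - 1) 0)
    else d2
  else d2

-- merge with the up neighbour: `if (r-1, c) in label: label[(r,c)] = label[(r-1,c)]`
def labUp (d1 : PySem.Dict (Int × Int) Int) (r c : Int) : PySem.Dict (Int × Int) Int :=
  labLeft (if d1.contains (r - 1, c) then d1.insert (r, c) (d1.getD (r - 1, c) 0) else d1) r c

-- body of B's inner `for c in range(m)` loop
def labStep (land : List (List Int)) (m : Int) (d : PySem.Dict (Int × Int) Int) (r c : Int) :
    PySem.Dict (Int × Int) Int :=
  if gRead land r c ≠ 0 then labUp (d.insert (r, c) (r * m + c)) r c else d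

-- body of B's grouping loop over `label.items()`
def grpStep (g : PySem.Dict Int (Int × PySem.Set Int)) (p : (Int × Int) × Int) :
    PySem.Dict Int (Int × PySem.Set Int) :=
  let g1 := if g.contains p.2 then g else g.insert p.2 (0, PySem.Set.empty)
  let pr := g1.getD p.2 (0, PySem.Set.empty)
  g1.insert p.2 (pr.1 + 1, PySem.Set.add pr.2 p.1.2)

-- body of B's `for cnt, cols in groups.values()` loop
def addGroup (d : List Int) (pr : Int × PySem.Set Int) : List Int :=
  pr.2.foldl (fun d col => PySem.List.pySetD d col (PySem.List.pyGetD d col 0 + pr.1)) d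

def solution_alt (land : List (List Int)) : Int :=
  let n : Int := PySem.List.len land
  let m : Int := PySem.List.len ((PySem.List.pyGet? land 0).getD [])
  let label := (PySem.List.pyRange 0 n 1).foldl (fun d r =>
      (PySem.List.pyRange 0 m 1).foldl (fun d c => labStep land m d r c) d) PySem.Dict.empty
  let groups := label.items.foldl grpStep PySem.Dict.empty
  let data := groups.values.foldl addGroup (PySem.List.pyRepeat [0] m)
  (PySem.List.max? data (fun x => x)).getD 0

-- ===== PRECONDITION & SPEC =====
-- Pre_: exactly the inputs where Python A returns normally: a nonempty grid, a nonempty first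
-- row, and no row shorter than the first (otherwise Python A raises IndexError or ValueError).
def Pre_solution (land : List (List Int)) : Prop :=
  land ≠ [] ∧ 0 < (land.headD []).length ∧ ∀ row ∈ land, (land.headD []).length ≤ row.length
instance (land : List (List Int)) : Decidable (Pre_solution land) := by
  unfold Pre_solution; infer_instance

def pvWitness_solution : List (List Int) := [[1, 0, 3], [0, 2, 2]]

def Spec_solution (land : List (List Int)) (out : Int) : Prop := out = solution_alt land
instance (land : List (List Int)) (out : Int) : Decidable (Spec_solution land out) := by
  unfold Spec_solution; infer_instance

-- ===== CLAIM (what is proved, stated in full; the proofs are below) =====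
def Claim_equal_solution : Prop :=
  ∀ (land : List (List Int)), Dom_solution land → Pre_solution land →
    Spec_solution land (solution land)

-- ===== LEMMAS AND PROOFS =====

-- Cells, liveness, adjacency and reachability in the ORIGINAL grid L.
def LiveC (L : List (List Int)) (n m : Int) (x : Int × Int) : Prop :=
  0 ≤ x.1 ∧ x.1 < n ∧ 0 ≤ x.2 ∧ x.2 < m ∧ gRead L x.1 x.2 ≠ 0

def AdjC (L : List (List Int)) (n m : Int) (x y : Int × Int) : Prop :=
  LiveC L n m x ∧ LiveC L n m y ∧
    ((y.1 = x.1 - 1 ∧ y.2 = x.2) ∨ (y.1 = x.1 + 1 ∧ y.2 = x.2) ∨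
     (y.1 = x.1 ∧ y.2 = x.2 - 1) ∨ (y.1 = x.1 ∧ y.2 = x.2 + 1))

def ReachC (L : List (List Int)) (n m : Int) : Int × Int → Int × Int → Prop :=
  Relation.ReflTransGen (AdjC L n m)

def ReachFromC (L : List (List Int)) (n m : Int) (q : List (Int × Int)) (x : Int × Int) : Prop :=
  ∃ s ∈ q, ReachC L n m s x

-- current grid g = original L with exactly the cells of M zeroed (at nonnegative indices)
def GRel (L g : List (List Int)) (M : Int × Int → Prop) : Prop :=
  ∀ r c : Int, 0 ≤ r → 0 ≤ c →
    (M (r, c) → gRead g r c = 0) ∧ (¬ M (r, c) → gRead g r c = gRead L r c)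

theorem GRel_congr {L g : List (List Int)} {M M' : Int × Int → Prop}
    (h : GRel L g M) (hiff : ∀ x, M x ↔ M' x) : GRel L g M' := by
  intro r c hr hc
  obtain ⟨h1, h2⟩ := h r c hr hc
  exact ⟨fun hm => h1 ((hiff (r, c)).mpr hm), fun hm => h2 (fun q => hm ((hiff (r, c)).mp q))⟩

theorem GRel_read {L g : List (List Int)} {M : Int × Int → Prop} (h : GRel L g M)
    {r c : Int} (hr : 0 ≤ r) (hc : 0 ≤ c) :
    (gRead g r c ≠ 0 ↔ gRead L r c ≠ 0 ∧ ¬ M (r, c)) := by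
  obtain ⟨h1, h2⟩ := h r c hr hc
  by_cases hm : M (r, c)
  · simp [h1 hm, hm]
  · simp [h2 hm, hm]

theorem gRead_some {g : List (List Int)} {r c : Int} (hr : 0 ≤ r) (hc : 0 ≤ c)
    (h : gRead g r c ≠ 0) :
    ∃ row, g[r.toNat]? = some row ∧ row[c.toNat]? = some (gRead g r c) := by
  unfold gRead at h ⊢
  rw [PySem.List.pyGet?_of_nonneg _ hr] at h ⊢
  rw [PySem.List.pyGet?_of_nonneg _ hc] at h ⊢
  rcases hg : g[r.toNat]? with _ | row
  · rw [hg] at h; simp at h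
  rw [hg] at h
  simp only [Option.getD_some] at h ⊢
  rcases hrow : row[c.toNat]? with _ | v
  · rw [hrow] at h; simp at h
  exact ⟨row, rfl, by simpa using hrow⟩

theorem gRead_gZero {g : List (List Int)} {r c : Int} (hr : 0 ≤ r) (hc : 0 ≤ c)
    (h : gRead g r c ≠ 0) (r' c' : Int) (hr' : 0 ≤ r') (hc' : 0 ≤ c') :
    gRead (gZero g r c) r' c' = if r' = r ∧ c' = c then 0 else gRead g r' c' := by
  obtain ⟨row, hg, hrow⟩ := gRead_some hr hc h
  have hi : r.toNat < g.length := (List.getElem?_eq_some_iff.mp hg).1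
  have hj : c.toNat < row.length := (List.getElem?_eq_some_iff.mp hrow).1
  have hzero : gZero g r c = g.set r.toNat (row.set c.toNat 0) := by
    unfold gZero
    rw [PySem.List.pyGet?_of_nonneg _ hr, hg]
    simp only [Option.getD_some]
    rw [PySem.List.pySetD_of_nonneg _ _ hc, PySem.List.pySetD_of_nonneg _ _ hr]
  rw [hzero]
  unfold gRead
  rw [PySem.List.pyGet?_of_nonneg _ hr', PySem.List.pyGet?_of_nonneg _ hr']
  by_cases hrr : r' = r
  · subst hrr
    rw [List.getElem?_set_self hi, hg]
    simp only [Option.getD_some]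
    rw [PySem.List.pyGet?_of_nonneg _ hc', PySem.List.pyGet?_of_nonneg _ hc']
    by_cases hcc : c' = c
    · subst hcc
      rw [List.getElem?_set_self hj]
      simp
    · have : c.toNat ≠ c'.toNat := by omega
      rw [List.getElem?_set_ne this]
      simp [hcc]
  · have : r.toNat ≠ r'.toNat := by omega
    rw [List.getElem?_set_ne this]
    simp [hrr]

theorem GRel_gZero {L g : List (List Int)} {M : Int × Int → Prop} (h : GRel L g M)
    {r c : Int} (hr : 0 ≤ r) (hc : 0 ≤ c) (hz : gRead g r c ≠ 0) :
    GRel L (gZero g r c) (fun x => M x ∨ x = (r, c)) := by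
  intro r' c' hr' hc'
  rw [gRead_gZero hr hc hz r' c' hr' hc']
  obtain ⟨h1, h2⟩ := h r' c' hr' hc'
  constructor
  · rintro (hm | hp)
    · split
      · rfl
      · exact h1 hm
    · have : r' = r ∧ c' = c := by
        rw [Prod.ext_iff] at hp; exact ⟨hp.1, hp.2⟩
      simp [this]
  · intro hm
    have hne : ¬(r' = r ∧ c' = c) := by
      intro ⟨e1, e2⟩
      exact hm (Or.inr (by rw [Prod.ext_iff]; exact ⟨e1, e2⟩))
    rw [if_neg hne]
    exact h2 (fun q => hm (Or.inl q))

-- A's neighbour scan, rephrased as a fold over the four neighbour cells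
def stepCellA (n m : Int) (s : List (List Int) × List (Int × Int)) (x : Int × Int) :
    List (List Int) × List (Int × Int) :=
  if 0 ≤ x.1 ∧ x.1 < n ∧ 0 ≤ x.2 ∧ x.2 < m ∧ gRead s.1 x.1 x.2 ≠ 0 then
    (gZero s.1 x.1 x.2, s.2 ++ [x])
  else s

def nbsA (cr cc : Int) : List (Int × Int) :=
  [(cr + -1, cc + 0), (cr + 1, cc + 0), (cr + 0, cc + -1), (cr + 0, cc + 1)]

theorem stepA_fold_eq (n m cr cc : Int) (g : List (List Int)) (rest : List (Int × Int)) :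
    (PySem.List.pyRange 0 4 1).foldl (stepA n m cr cc) (g, rest) =
      (nbsA cr cc).foldl (stepCellA n m) (g, rest) := rfl

theorem mem_nbsA (cr cc : Int) (y : Int × Int) :
    y ∈ nbsA cr cc ↔
      ((y.1 = cr - 1 ∧ y.2 = cc) ∨ (y.1 = cr + 1 ∧ y.2 = cc) ∨
       (y.1 = cr ∧ y.2 = cc - 1) ∨ (y.1 = cr ∧ y.2 = cc + 1)) := by
  obtain ⟨a, b⟩ := y
  have e1 : cr + -1 = cr - 1 := by ring
  have e2 : cc + -1 = cc - 1 := by ring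
  have e3 : cc + 0 = cc := by ring
  have e4 : cr + 0 = cr := by ring
  simp only [nbsA, e1, e2, e3, e4, List.mem_cons, List.not_mem_nil, or_false, Prod.mk.injEq]

theorem nbsA_nodup (cr cc : Int) : (nbsA cr cc).Nodup := by
  refine List.Nodup.cons ?_ (List.Nodup.cons ?_ (List.Nodup.cons ?_ (List.nodup_singleton _))) <;>
    (simp only [List.mem_cons, List.not_mem_nil, or_false, Prod.mk.injEq, not_or, not_and]; omega)

theorem foldCellA_spec (L : List (List Int)) (n m : Int)
    (nbs : List (Int × Int)) :
    ∀ (g : List (List Int)) (acc : List (Int × Int)) (M : Int × Int → Prop),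
      GRel L g M → nbs.Nodup →
      ∃ F : List (Int × Int),
        (nbs.foldl (stepCellA n m) (g, acc)).2 = acc ++ F ∧
        (∀ y, y ∈ F ↔ (y ∈ nbs ∧ LiveC L n m y ∧ ¬ M y)) ∧
        F.Nodup ∧
        GRel L (nbs.foldl (stepCellA n m) (g, acc)).1 (fun x => M x ∨ x ∈ F) := by
  induction nbs with
  | nil =>
    intro g acc M hGR _
    refine ⟨[], by simp, by simp, List.nodup_nil, ?_⟩
    exact GRel_congr hGR (by simp)
  | cons x t ih =>
    intro g acc M hGR hnd
    obtain ⟨a, b⟩ := x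
    have hxt : (a, b) ∉ t := (List.nodup_cons.mp hnd).1
    have hndt : t.Nodup := (List.nodup_cons.mp hnd).2
    by_cases hcond : 0 ≤ a ∧ a < n ∧ 0 ≤ b ∧ b < m ∧ gRead g a b ≠ 0
    · -- the neighbour is live and unmarked: it is zeroed and appended
      obtain ⟨h1, h2, h3, h4, h5⟩ := hcond
      have hfresh : gRead L a b ≠ 0 ∧ ¬ M (a, b) := (GRel_read hGR h1 h3).mp h5
      have hlive : LiveC L n m (a, b) := ⟨h1, h2, h3, h4, hfresh.1⟩
      have hstep : stepCellA n m (g, acc) (a, b) = (gZero g a b, acc ++ [(a, b)]) := by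
        unfold stepCellA
        rw [if_pos ⟨h1, h2, h3, h4, h5⟩]
      have hGR' : GRel L (gZero g a b) (fun y => M y ∨ y = (a, b)) :=
        GRel_gZero hGR h1 h3 h5
      obtain ⟨F1, hF1acc, hF1mem, hF1nd, hF1GR⟩ :=
        ih (gZero g a b) (acc ++ [(a, b)]) (fun y => M y ∨ y = (a, b)) hGR' hndt
      refine ⟨(a, b) :: F1, ?_, ?_, ?_, ?_⟩
      · rw [List.foldl_cons, hstep, hF1acc, List.append_assoc]; rfl
      · intro y
        rw [List.mem_cons, hF1mem y]
        constructor
        · rintro (rfl | ⟨hyt, hyl, hyM⟩)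
          · exact ⟨List.mem_cons_self, hlive, hfresh.2⟩
          · exact ⟨List.mem_cons_of_mem _ hyt, hyl, fun q => hyM (Or.inl q)⟩
        · rintro ⟨hyx, hyl, hyM⟩
          rcases List.mem_cons.mp hyx with rfl | hyt
          · exact Or.inl rfl
          · refine Or.inr ⟨hyt, hyl, ?_⟩
            rintro (q | rfl)
            · exact hyM q
            · exact hxt hyt
      · refine List.nodup_cons.mpr ⟨?_, hF1nd⟩
        intro hmem
        exact ((hF1mem (a, b)).mp hmem).2.2 (Or.inr rfl)
      · rw [List.foldl_cons, hstep]
        exact GRel_congr hF1GR (by intro y; rw [List.mem_cons]; tauto)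
    · -- the neighbour is skipped
      have hstep : stepCellA n m (g, acc) (a, b) = (g, acc) := by
        unfold stepCellA
        rw [if_neg hcond]
      have hnot : ¬ (LiveC L n m (a, b) ∧ ¬ M (a, b)) := by
        rintro ⟨⟨h1, h2, h3, h4, h5⟩, hM⟩
        exact hcond ⟨h1, h2, h3, h4, (GRel_read hGR h1 h3).mpr ⟨h5, hM⟩⟩
      obtain ⟨F1, hF1acc, hF1mem, hF1nd, hF1GR⟩ := ih g acc M hGR hndt
      refine ⟨F1, by rw [List.foldl_cons, hstep]; exact hF1acc, ?_, hF1nd, ?_⟩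
      · intro y
        rw [hF1mem y]
        constructor
        · rintro ⟨hyt, hyl, hyM⟩
          exact ⟨List.mem_cons_of_mem _ hyt, hyl, hyM⟩
        · rintro ⟨hyx, hyl, hyM⟩
          rcases List.mem_cons.mp hyx with rfl | hyt
          · exact absurd ⟨hyl, hyM⟩ hnot
          · exact ⟨hyt, hyl, hyM⟩
      · rw [List.foldl_cons, hstep]
        exact hF1GR

theorem bfsLoop_master (L : List (List Int)) (n m : Int) (g : List (List Int))
    (q : List (Int × Int)) (cnt : Int) (cols : PySem.Set Int) :
    ∀ P : List (Int × Int),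
      GRel L g (fun x => x ∈ P ∨ x ∈ q) →
      (∀ x, x ∈ P ∨ x ∈ q → LiveC L n m x) →
      (P ++ q).Nodup →
      (∀ x ∈ P, ∀ y, AdjC L n m x y → y ∈ P ∨ y ∈ q) →
      ∃ pl : List (Int × Int),
        (bfsLoop n m g q cnt cols).2.1 = cnt + pl.length ∧
        (bfsLoop n m g q cnt cols).2.2 = pl.foldl (fun s p => PySem.Set.add s p.2) cols ∧
        (P ++ pl).Nodup ∧
        (∀ x, (x ∈ P ∨ x ∈ pl) ↔ (x ∈ P ∨ ReachFromC L n m q x)) ∧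
        GRel L (bfsLoop n m g q cnt cols).1 (fun x => x ∈ P ∨ x ∈ pl) := by
  fun_induction bfsLoop n m g q cnt cols with
  | case1 g cnt cols =>
    intro P hGR hLive hND hPcl
    refine ⟨[], by simp, by simp, hND, ?_, ?_⟩
    · intro x; simp [ReachFromC]
    · exact GRel_congr hGR (by simp)
  | case2 g cnt cols cr cc rest s ih =>
    intro P hGR hLive hND hPcl
    have hs : s = (nbsA cr cc).foldl (stepCellA n m) (g, rest) := stepA_fold_eq n m cr cc g rest
    obtain ⟨F, hFacc, hFmem, hFnd, hFGR⟩ :=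
      foldCellA_spec L n m (nbsA cr cc) g rest
        (fun x => x ∈ P ∨ x ∈ (cr, cc) :: rest) hGR (nbsA_nodup cr cc)
    rw [hs] at ih ⊢
    have hulive : LiveC L n m (cr, cc) := hLive (cr, cc) (Or.inr List.mem_cons_self)
    -- the new queue is rest ++ F
    have hq1 : ((nbsA cr cc).foldl (stepCellA n m) (g, rest)).2 = rest ++ F := hFacc
    -- adjacency from the popped cell into F
    have hFAdj : ∀ y ∈ F, AdjC L n m (cr, cc) y := by
      intro y hy
      obtain ⟨hynbs, hylive, _⟩ := (hFmem y).mp hy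
      exact ⟨hulive, hylive, (mem_nbsA cr cc y).mp hynbs⟩
    -- invariants for the recursive call, with popped list P ++ [(cr, cc)]
    have ihGR : GRel L ((nbsA cr cc).foldl (stepCellA n m) (g, rest)).1
        (fun x => x ∈ P ++ [(cr, cc)] ∨ x ∈ ((nbsA cr cc).foldl (stepCellA n m) (g, rest)).2) := by
      refine GRel_congr hFGR ?_
      intro x
      rw [hq1]
      simp only [List.mem_append, List.mem_cons, List.not_mem_nil, or_false]
      tauto
    have ihLive : ∀ x, x ∈ P ++ [(cr, cc)] ∨
        x ∈ ((nbsA cr cc).foldl (stepCellA n m) (g, rest)).2 → LiveC L n m x := by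
      intro x hx
      rw [hq1] at hx
      simp only [List.mem_append, List.mem_singleton] at hx
      rcases hx with (hx | rfl) | hx | hx
      · exact hLive x (Or.inl hx)
      · exact hulive
      · exact hLive x (Or.inr (List.mem_cons_of_mem _ hx))
      · exact ((hFmem x).mp hx).2.1
    have ihND : ((P ++ [(cr, cc)]) ++
        ((nbsA cr cc).foldl (stepCellA n m) (g, rest)).2).Nodup := by
      rw [hq1]
      have he : (P ++ [(cr, cc)]) ++ (rest ++ F) = (P ++ (cr, cc) :: rest) ++ F := by
        simp
      rw [he]
      rw [List.nodup_append]
      refine ⟨hND, hFnd, ?_⟩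
      intro a ha b hbF heq
      subst heq
      have := ((hFmem a).mp hbF).2.2
      apply this
      rcases List.mem_append.mp ha with h | h
      · exact Or.inl h
      · exact Or.inr h
    have ihPcl : ∀ x ∈ P ++ [(cr, cc)], ∀ y, AdjC L n m x y →
        y ∈ P ++ [(cr, cc)] ∨ y ∈ ((nbsA cr cc).foldl (stepCellA n m) (g, rest)).2 := by
      intro x hx y hxy
      rw [hq1]
      rcases List.mem_append.mp hx with hxP | hxu
      · rcases hPcl x hxP y hxy with h | h
        · exact Or.inl (List.mem_append.mpr (Or.inl h))
        · rcases List.mem_cons.mp h with rfl | h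
          · exact Or.inl (List.mem_append.mpr (Or.inr (List.mem_singleton_self _)))
          · exact Or.inr (List.mem_append.mpr (Or.inl h))
      · rcases List.mem_singleton.mp hxu with rfl
        obtain ⟨_, hylive, hoff⟩ := hxy
        have hynbs : y ∈ nbsA cr cc := (mem_nbsA cr cc y).mpr hoff
        by_cases hM : y ∈ P ∨ y ∈ (cr, cc) :: rest
        · rcases hM with h | h
          · exact Or.inl (List.mem_append.mpr (Or.inl h))
          · rcases List.mem_cons.mp h with rfl | h
            · exact Or.inl (List.mem_append.mpr (Or.inr (List.mem_singleton_self _)))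
            · exact Or.inr (List.mem_append.mpr (Or.inl h))
        · exact Or.inr (List.mem_append.mpr (Or.inr ((hFmem y).mpr ⟨hynbs, hylive, hM⟩)))
    obtain ⟨pl1, h1, h2, h3, h4, h5⟩ := ih (P ++ [(cr, cc)]) ihGR ihLive ihND ihPcl
    simp only [hq1] at h4
    refine ⟨(cr, cc) :: pl1, ?_, ?_, ?_, ?_, ?_⟩
    · rw [h1]; simp only [List.length_cons]; push_cast; ring
    · rw [h2]; rfl
    · have he : P ++ (cr, cc) :: pl1 = (P ++ [(cr, cc)]) ++ pl1 := by simp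
      rw [he]; exact h3
    · -- membership characterization
      have hq1' : ∀ x, ReachFromC L n m (rest ++ F) x → ReachFromC L n m ((cr, cc) :: rest) x := by
        intro x hx
        obtain ⟨s0, hs0, hr⟩ := hx
        rcases List.mem_append.mp hs0 with h | h
        · exact ⟨s0, List.mem_cons_of_mem _ h, hr⟩
        · exact ⟨(cr, cc), List.mem_cons_self, Relation.ReflTransGen.head (hFAdj s0 h) hr⟩
      have hreach_u : ∀ x, ReachC L n m (cr, cc) x →
          (x ∈ P ++ [(cr, cc)] ∨ ReachFromC L n m (rest ++ F) x) := by
        intro x hx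
        have hx' : Relation.ReflTransGen (AdjC L n m) (cr, cc) x := hx
        clear hx
        induction hx' with
        | refl => exact Or.inl (List.mem_append.mpr (Or.inr (List.mem_singleton_self _)))
        | tail hab hbc ihT =>
          rename_i b c
          rcases ihT with hbP | ⟨s0, hs0, hr⟩
          · rcases List.mem_append.mp hbP with hbP | hbu
            · rcases hPcl b hbP c hbc with h | h
              · exact Or.inl (List.mem_append.mpr (Or.inl h))
              · rcases List.mem_cons.mp h with rfl | h
                · exact Or.inl (List.mem_append.mpr (Or.inr (List.mem_singleton_self _)))
                · exact Or.inr ⟨c, List.mem_append.mpr (Or.inl h), Relation.ReflTransGen.refl⟩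
            · rcases List.mem_singleton.mp hbu with rfl
              obtain ⟨_, hclive, hoff⟩ := hbc
              have hcnbs : c ∈ nbsA cr cc := (mem_nbsA cr cc c).mpr hoff
              by_cases hM : c ∈ P ∨ c ∈ (cr, cc) :: rest
              · rcases hM with h | h
                · exact Or.inl (List.mem_append.mpr (Or.inl h))
                · rcases List.mem_cons.mp h with rfl | h
                  · exact Or.inl (List.mem_append.mpr (Or.inr (List.mem_singleton_self _)))
                  · exact Or.inr ⟨c, List.mem_append.mpr (Or.inl h), Relation.ReflTransGen.refl⟩
              · exact Or.inr ⟨c, List.mem_append.mpr (Or.inr ((hFmem c).mpr ⟨hcnbs, hclive, hM⟩)),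
                  Relation.ReflTransGen.refl⟩
          · exact Or.inr ⟨s0, hs0, Relation.ReflTransGen.tail hr hbc⟩
      intro x
      constructor
      · rintro (hxP | hxpl)
        · exact Or.inl hxP
        · rcases List.mem_cons.mp hxpl with rfl | hxpl
          · exact Or.inr ⟨(cr, cc), List.mem_cons_self, Relation.ReflTransGen.refl⟩
          · rcases (h4 x).mp (Or.inr hxpl) with hxP1 | hr
            · rcases List.mem_append.mp hxP1 with h | h
              · exact Or.inl h
              · rcases List.mem_singleton.mp h with rfl
                exact Or.inr ⟨(cr, cc), List.mem_cons_self, Relation.ReflTransGen.refl⟩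
            · exact Or.inr (hq1' x hr)
      · rintro (hxP | ⟨s0, hs0, hr⟩)
        · exact Or.inl hxP
        · rcases List.mem_cons.mp hs0 with rfl | hs0rest
          · rcases hreach_u x hr with hxP1 | hrF
            · rcases List.mem_append.mp hxP1 with h | h
              · exact Or.inl h
              · rcases List.mem_singleton.mp h with rfl
                exact Or.inr List.mem_cons_self
            · rcases (h4 x).mpr (Or.inr hrF) with hxP1 | hxpl
              · rcases List.mem_append.mp hxP1 with h | h
                · exact Or.inl h
                · rcases List.mem_singleton.mp h with rfl
                  exact Or.inr List.mem_cons_self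
              · exact Or.inr (List.mem_cons_of_mem _ hxpl)
          · have : ReachFromC L n m (rest ++ F) x := ⟨s0, List.mem_append.mpr (Or.inl hs0rest), hr⟩
            rcases (h4 x).mpr (Or.inr this) with hxP1 | hxpl
            · rcases List.mem_append.mp hxP1 with h | h
              · exact Or.inl h
              · rcases List.mem_singleton.mp h with rfl
                exact Or.inr List.mem_cons_self
            · exact Or.inr (List.mem_cons_of_mem _ hxpl)
    · refine GRel_congr h5 ?_
      intro x
      simp only [List.mem_append, List.mem_cons]
      tauto

theorem pvReachLive {L : List (List Int)} {n m : Int} {u x : Int × Int}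
    (hu : LiveC L n m u) (h : ReachC L n m u x) : LiveC L n m x := by
  have h' : Relation.ReflTransGen (AdjC L n m) u x := h
  induction h' with
  | refl => exact hu
  | tail hab hbc ihT => exact hbc.2.1

-- result of the column-increment loop, entrywise
theorem pvFoldIncrGet (k : Int) :
    ∀ (cols : List Int) (d : List Int), cols.Nodup → (∀ c ∈ cols, 0 ≤ c) →
      (cols.foldl (fun d col => PySem.List.pySetD d col (PySem.List.pyGetD d col 0 + k)) d).length
          = d.length ∧
      ∀ (j : Nat) (hj : j < d.length),
        (cols.foldl (fun d col => PySem.List.pySetD d col (PySem.List.pyGetD d col 0 + k)) d)[j]?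
          = some (d[j]'hj + if (j : Int) ∈ cols then k else 0) := by
  intro cols
  induction cols with
  | nil =>
    intro d _ _
    refine ⟨rfl, ?_⟩
    intro j hj
    simp [List.getElem?_eq_getElem hj]
  | cons c t ih =>
    intro d hnd hnn
    have hc0 : 0 ≤ c := hnn c List.mem_cons_self
    have hct : c ∉ t := (List.nodup_cons.mp hnd).1
    have hd1 : PySem.List.pySetD d c (PySem.List.pyGetD d c 0 + k) =
        d.set c.toNat (PySem.List.pyGetD d c 0 + k) := PySem.List.pySetD_of_nonneg _ _ hc0
    have hlen1 : (d.set c.toNat (PySem.List.pyGetD d c 0 + k)).length = d.length := by simp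
    obtain ⟨ihlen, ihget⟩ := ih (d.set c.toNat (PySem.List.pyGetD d c 0 + k))
      (List.nodup_cons.mp hnd).2 (fun c' hc' => hnn c' (List.mem_cons_of_mem _ hc'))
    refine ⟨?_, ?_⟩
    · simp only [List.foldl_cons, hd1]
      rw [ihlen, hlen1]
    · intro j hj
      simp only [List.foldl_cons, hd1]
      have hj1 : j < (d.set c.toNat (PySem.List.pyGetD d c 0 + k)).length := by
        rw [hlen1]; exact hj
      rw [ihget j hj1]
      by_cases hjc : (j : Int) = c
      · have hct' : c.toNat = j := by omega
        have hcd : c.toNat < d.length := by omega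
        have hset : (d.set c.toNat (PySem.List.pyGetD d c 0 + k))[j]'hj1 =
            PySem.List.pyGetD d c 0 + k := by
          simp only [← hct']
          exact List.getElem_set_self (by simpa using hcd)
        have hget : PySem.List.pyGetD d c 0 = d[j]'hj := by
          rw [PySem.List.pyGetD_eq_getElem d 0 hc0 (by omega)]
          simp only [hct']
        have hcc : ((j : Int) ∈ c :: t) := by rw [hjc]; exact List.mem_cons_self
        have hjt : ((j : Int)) ∉ t := by rw [hjc]; exact hct
        rw [hset, hget, if_pos hcc, if_neg hjt]
        simp
      · have hne : c.toNat ≠ j := by omega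
        have hset : (d.set c.toNat (PySem.List.pyGetD d c 0 + k))[j]'hj1 = d[j]'hj := by
          rw [List.getElem_set_ne hne]
        rw [hset]
        have hmm : ((j : Int) ∈ c :: t) = ((j : Int) ∈ t) := by
          simp [List.mem_cons, hjc]
        simp only [hmm]

-- ===== scan order =====
def scanLt (x y : Int × Int) : Prop := x.1 < y.1 ∨ (x.1 = y.1 ∧ x.2 < y.2)

def scanList (n m : Int) : List (Int × Int) :=
  (PySem.List.pyRange 0 n 1).flatMap (fun r => (PySem.List.pyRange 0 m 1).map (fun c => (r, c)))

theorem pyRange_zero_eq (n : Int) :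
    PySem.List.pyRange 0 n 1 = (List.range n.toNat).map (fun k : Nat => (k : Int)) := by
  rcases n with k | k
  · exact PySem.List.pyRange_zero_natCast k
  · have h1 : PySem.List.pyRange 0 (Int.negSucc k) 1 = [] := by
      rw [List.eq_nil_iff_forall_not_mem]
      intro a ha
      have := PySem.List.mem_pyRange_one.mp ha
      omega
    simp [h1]

theorem mem_scanList (n m : Int) (x : Int × Int) :
    x ∈ scanList n m ↔ 0 ≤ x.1 ∧ x.1 < n ∧ 0 ≤ x.2 ∧ x.2 < m := by
  obtain ⟨a, b⟩ := x
  simp only [scanList, List.mem_flatMap, List.mem_map, PySem.List.mem_pyRange_one,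
    Prod.mk.injEq]
  constructor
  · rintro ⟨r, hr, c, hc, rfl, rfl⟩
    exact ⟨hr.1, hr.2, hc.1, hc.2⟩
  · rintro ⟨h1, h2, h3, h4⟩
    exact ⟨a, ⟨h1, h2⟩, b, ⟨h3, h4⟩, rfl, rfl⟩

theorem pairwise_scanList (n m : Int) : (scanList n m).Pairwise scanLt := by
  rw [scanList]
  rw [List.pairwise_flatMap]
  constructor
  · intro r _
    rw [List.pairwise_map, pyRange_zero_eq, List.pairwise_map]
    have base : (List.range m.toNat).Pairwise (fun a b : Nat => a < b) := List.pairwise_lt_range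
    exact base.imp (fun {a b} hab => by
      refine Or.inr ⟨rfl, ?_⟩
      exact show ((a : Int) < (b : Int)) by exact_mod_cast hab)
  · rw [pyRange_zero_eq n, List.pairwise_map]
    have base : (List.range n.toNat).Pairwise (fun a b : Nat => a < b) := List.pairwise_lt_range
    refine base.imp (fun {a b} hab => ?_)
    intro x hx y hy
    obtain ⟨c, _, rfl⟩ := List.mem_map.mp hx
    obtain ⟨c', _, rfl⟩ := List.mem_map.mp hy
    refine Or.inl ?_
    exact show ((a : Int) < (b : Int)) by exact_mod_cast hab

theorem nested_foldl_eq_scan {α : Type} (f : α → Int → Int → α) (n m : Int) (init : α) :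
    (PySem.List.pyRange 0 n 1).foldl (fun a r =>
      (PySem.List.pyRange 0 m 1).foldl (fun a c => f a r c) a) init
      = (scanList n m).foldl (fun a p => f a p.1 p.2) init := by
  rw [scanList, List.foldl_flatMap]
  apply PySem.List.foldl_congr_mem
  intro acc r _
  rw [List.foldl_map]

theorem scan_split {n m : Int} {q rest : List (Int × Int)} {x : Int × Int}
    (h : scanList n m = q ++ x :: rest) :
    (0 ≤ x.1 ∧ x.1 < n ∧ 0 ≤ x.2 ∧ x.2 < m) ∧ x ∉ q ∧
      (∀ y, y ∈ q ↔ ((0 ≤ y.1 ∧ y.1 < n ∧ 0 ≤ y.2 ∧ y.2 < m) ∧ scanLt y x)) := by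
  have hpw : (q ++ x :: rest).Pairwise scanLt := h ▸ pairwise_scanList n m
  rw [List.pairwise_append] at hpw
  obtain ⟨hq, hxr, hcross⟩ := hpw
  have hqx : ∀ y ∈ q, scanLt y x := fun y hy => hcross y hy x List.mem_cons_self
  have hxrest : ∀ z ∈ rest, scanLt x z := (List.pairwise_cons.mp hxr).1
  have hmem : ∀ y, y ∈ scanList n m ↔ y ∈ q ∨ y = x ∨ y ∈ rest := by
    intro y; rw [h]; simp [List.mem_append]
  have hxm : x ∈ scanList n m := (hmem x).mpr (Or.inr (Or.inl rfl))
  have hxb := (mem_scanList n m x).mp hxm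
  have hirr : ∀ y : Int × Int, ¬ scanLt y y := by
    intro y hy; rcases hy with h | ⟨_, h⟩ <;> omega
  have hasym : ∀ y z : Int × Int, scanLt y z → ¬ scanLt z y := by
    intro y z h1 h2
    rcases h1 with h1 | ⟨e1, h1⟩ <;> rcases h2 with h2 | ⟨e2, h2⟩ <;> omega
  refine ⟨hxb, ?_, ?_⟩
  · intro hxq
    exact hirr x (hqx x hxq)
  · intro y
    constructor
    · intro hy
      exact ⟨(mem_scanList n m y).mp ((hmem y).mpr (Or.inl hy)), hqx y hy⟩
    · rintro ⟨hb, hlt⟩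
      rcases (hmem y).mp ((mem_scanList n m y).mpr hb) with hy | rfl | hy
      · exact hy
      · exact absurd hlt (hirr y)
      · exact absurd hlt (hasym x y (hxrest y hy))

theorem foldl_prefix_inv {α : Type} (f : α → (Int × Int) → α) (R : List (Int × Int) → α → Prop)
    (full : List (Int × Int)) :
    ∀ (l pre : List (Int × Int)) (a : α), pre ++ l = full → R pre a →
      (∀ q x rest a', full = q ++ x :: rest → R q a' → R (q ++ [x]) (f a' x)) →
      R full (l.foldl f a) := by
  intro l
  induction l with
  | nil =>
    intro pre a hfull hR _
    simpa [← hfull] using hR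
  | cons x t ih =>
    intro pre a hfull hR hstep
    rw [List.foldl_cons]
    refine ih (pre ++ [x]) (f a x) (by simpa using hfull) ?_ hstep
    exact hstep pre x t a hfull.symm hR

-- ===== abstract component machinery =====
theorem adjC_symm {L : List (List Int)} {n m : Int} {x y : Int × Int}
    (h : AdjC L n m x y) : AdjC L n m y x := by
  obtain ⟨hx, hy, hoff⟩ := h
  refine ⟨hy, hx, ?_⟩
  rcases hoff with ⟨e1, e2⟩ | ⟨e1, e2⟩ | ⟨e1, e2⟩ | ⟨e1, e2⟩
  · exact Or.inr (Or.inl ⟨by omega, by omega⟩)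
  · exact Or.inl ⟨by omega, by omega⟩
  · exact Or.inr (Or.inr (Or.inr ⟨by omega, by omega⟩))
  · exact Or.inr (Or.inr (Or.inl ⟨by omega, by omega⟩))

theorem reachC_symm {L : List (List Int)} {n m : Int} {x y : Int × Int}
    (h : ReachC L n m x y) : ReachC L n m y x :=
  Relation.ReflTransGen.symmetric (fun _ _ => adjC_symm) h

def classClosed (L : List (List Int)) (n m : Int) (K : List (Int × Int)) : Prop :=
  ∀ y ∈ K, ∀ z, z ∈ K ↔ ReachC L n m y z

def TouchJ (L : List (List Int)) (n m j : Int) (y : Int × Int) : Prop :=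
  ∃ x, ReachC L n m y x ∧ x.2 = j

noncomputable def tcount (L : List (List Int)) (n m j : Int) (S : List (Int × Int)) : Int :=
  (S.countP (fun y => @decide (TouchJ L n m j y) (Classical.propDecidable _)) : Int)

theorem tcount_nil (L : List (List Int)) (n m j : Int) : tcount L n m j [] = 0 := by
  simp [tcount]

theorem tcount_append (L : List (List Int)) (n m j : Int) (S T : List (Int × Int)) :
    tcount L n m j (S ++ T) = tcount L n m j S + tcount L n m j T := by
  simp [tcount, List.countP_append]

theorem tcount_perm (L : List (List Int)) (n m j : Int) {S T : List (Int × Int)}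
    (h : S.Perm T) : tcount L n m j S = tcount L n m j T := by
  simp [tcount, h.countP_eq]

theorem tcount_class (L : List (List Int)) (n m j : Int) (K : List (Int × Int))
    (hK : classClosed L n m K) :
    tcount L n m j K = if (j : Int) ∈ K.map Prod.snd then (K.length : Int) else 0 := by
  by_cases hj : (j : Int) ∈ K.map Prod.snd
  · rw [if_pos hj]
    unfold tcount
    have : K.countP (fun y => @decide (TouchJ L n m j y) (Classical.propDecidable _)) =
        K.length := by
      rw [List.countP_eq_length]
      intro y hy
      obtain ⟨x, hxK, hx2⟩ := List.mem_map.mp hj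
      exact @decide_eq_true _ (Classical.propDecidable _) ⟨x, (hK y hy x).mp hxK, hx2⟩
    rw [this]
  · rw [if_neg hj]
    unfold tcount
    have : K.countP (fun y => @decide (TouchJ L n m j y) (Classical.propDecidable _)) = 0 := by
      rw [List.countP_eq_zero]
      intro y hy hdec
      obtain ⟨x, hr, hx2⟩ := @of_decide_eq_true _ (Classical.propDecidable _) hdec
      exact hj (List.mem_map.mpr ⟨x, (hK y hy x).mpr hr, hx2⟩)
    rw [this]
    rfl

-- ===== A-side invariant =====
def ConnClosed (L : List (List Int)) (n m : Int) (S : List (Int × Int)) : Prop :=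
  ∀ x ∈ S, ∀ y, AdjC L n m x y → y ∈ S

def InvA (L : List (List Int)) (n m : Int) (q : List (Int × Int))
    (st : List (List Int) × List Int) : Prop :=
  ∃ S : List (Int × Int),
    GRel L st.1 (fun x => x ∈ S) ∧ S.Nodup ∧ (∀ x ∈ S, LiveC L n m x) ∧
    ConnClosed L n m S ∧ (∀ x ∈ q, LiveC L n m x → x ∈ S) ∧
    st.2.length = m.toNat ∧
    ∀ (j : Nat) (hj : j < st.2.length), st.2[j]'hj = tcount L n m (j : Int) S

theorem reach_closed {L : List (List Int)} {n m : Int} {S : List (Int × Int)}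
    (hcl : ConnClosed L n m S) {y w : Int × Int} (hy : y ∈ S) (h : ReachC L n m y w) :
    w ∈ S := by
  have h' : Relation.ReflTransGen (AdjC L n m) y w := h
  clear h
  induction h' with
  | refl => exact hy
  | tail hab hbc ihT => exact hcl _ ihT _ hbc

theorem cellA_preserves (L : List (List Int)) (n m : Int) (q rest : List (Int × Int))
    (x : Int × Int) (st : List (List Int) × List Int)
    (hsplit : scanList n m = q ++ x :: rest) (h : InvA L n m q st) :
    InvA L n m (q ++ [x]) (cellA n m st x.1 x.2) := by
  obtain ⟨S, hGR, hnd, hliveS, hclosed, hcov, hlen, hdata⟩ := h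
  obtain ⟨hxb, hxq, hqchar⟩ := scan_split hsplit
  obtain ⟨r, c⟩ := x
  obtain ⟨hx1, hx2, hx3, hx4⟩ := hxb
  unfold cellA
  by_cases hg : gRead st.1 r c ≠ 0
  · rw [if_pos hg]
    have hfresh := (GRel_read hGR hx1 hx3).mp hg
    have hlivex : LiveC L n m (r, c) := ⟨hx1, hx2, hx3, hx4, hfresh.1⟩
    obtain ⟨pl, a1, a2, a3, a4, a5⟩ :=
      bfsLoop_master L n m (gZero st.1 r c) [(r, c)] 0 PySem.Set.empty S
        (by
          refine GRel_congr (GRel_gZero hGR hx1 hx3 hg) ?_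
          intro y
          simp only [List.mem_singleton])
        (by
          intro y hy
          rcases hy with hy | hy
          · exact hliveS y hy
          · rcases List.mem_singleton.mp hy with rfl
            exact hlivex)
        (by
          rw [List.nodup_append]
          refine ⟨hnd, List.nodup_singleton _, ?_⟩
          intro a ha b hb heq
          subst heq
          rcases List.mem_singleton.mp hb with rfl
          exact hfresh.2 ha)
        (fun y hy z hz => Or.inl (hclosed y hy z hz))
    have hplS : ∀ z ∈ pl, z ∉ S := by
      intro z hz hzS
      rw [List.nodup_append] at a3
      exact a3.2.2 z hzS z hz rfl
    have hplreach : ∀ z, z ∈ pl ↔ ReachC L n m (r, c) z := by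
      intro z
      constructor
      · intro hz
        rcases (a4 z).mp (Or.inr hz) with hzS | ⟨s0, hs0, hr⟩
        · exact absurd hzS (hplS z hz)
        · rcases List.mem_singleton.mp hs0 with rfl
          exact hr
      · intro hr
        have hzS : z ∉ S := fun hzS => hfresh.2 (reach_closed hclosed hzS (reachC_symm hr))
        rcases (a4 z).mpr (Or.inr ⟨(r, c), List.mem_singleton_self _, hr⟩) with h' | h'
        · exact absurd h' hzS
        · exact h'
    have hpllive : ∀ z ∈ pl, LiveC L n m z :=
      fun z hz => pvReachLive hlivex ((hplreach z).mp hz)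
    have hclassK : classClosed L n m pl := by
      intro y hy z
      rw [hplreach z]
      have hrcy : ReachC L n m (r, c) y := (hplreach y).mp hy
      constructor
      · intro hz
        exact Relation.ReflTransGen.trans (reachC_symm hrcy) hz
      · intro hz
        exact Relation.ReflTransGen.trans hrcy hz
    have hcols : (bfsLoop n m (gZero st.1 r c) [(r, c)] 0 PySem.Set.empty).2.2 =
        PySem.Set.ofList (pl.map (fun p => p.2)) := by
      rw [a2, ← PySem.Set.update_map_eq_foldl_add, PySem.Set.update_empty]
    obtain ⟨hlen2, hget2⟩ :=
      pvFoldIncrGet ((bfsLoop n m (gZero st.1 r c) [(r, c)] 0 PySem.Set.empty).2.1)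
        (PySem.Set.ofList (pl.map (fun p => p.2))) st.2 (PySem.Set.nodup_ofList _)
        (by
          intro col hcol
          rw [PySem.Set.mem_ofList] at hcol
          obtain ⟨p, hp, rfl⟩ := List.mem_map.mp hcol
          exact (hpllive p hp).2.2.1)
    refine ⟨S ++ pl, ?_, a3, ?_, ?_, ?_, ?_, ?_⟩
    · refine GRel_congr a5 ?_
      intro y
      rw [List.mem_append]
    · intro y hy
      rcases List.mem_append.mp hy with hy | hy
      · exact hliveS y hy
      · exact hpllive y hy
    · intro y hy z hz
      rcases List.mem_append.mp hy with hy | hy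
      · exact List.mem_append.mpr (Or.inl (hclosed y hy z hz))
      · refine List.mem_append.mpr (Or.inr ?_)
        rw [hplreach]
        exact Relation.ReflTransGen.tail ((hplreach y).mp hy) hz
    · intro y hy hylive
      rcases List.mem_append.mp hy with hy | hy
      · exact List.mem_append.mpr (Or.inl (hcov y hy hylive))
      · rcases List.mem_singleton.mp hy with rfl
        exact List.mem_append.mpr (Or.inr ((hplreach _).mpr Relation.ReflTransGen.refl))
    · dsimp only
      rw [hcols, hlen2]
      exact hlen
    · dsimp only
      intro j hj
      have hlenA : (((bfsLoop n m (gZero st.1 r c) [(r, c)] 0 PySem.Set.empty).2.2).foldl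
          (fun d col => PySem.List.pySetD d col (PySem.List.pyGetD d col 0 +
            (bfsLoop n m (gZero st.1 r c) [(r, c)] 0 PySem.Set.empty).2.1)) st.2).length =
          st.2.length := by
        rw [hcols]; exact hlen2
      have hj0 : j < st.2.length := by
        rw [hlenA] at hj
        exact hj
      have hsome : (((bfsLoop n m (gZero st.1 r c) [(r, c)] 0 PySem.Set.empty).2.2).foldl
          (fun d col => PySem.List.pySetD d col (PySem.List.pyGetD d col 0 +
            (bfsLoop n m (gZero st.1 r c) [(r, c)] 0 PySem.Set.empty).2.1)) st.2)[j]? =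
          some (st.2[j]'hj0 + if (j : Int) ∈ PySem.Set.ofList (pl.map (fun p => p.2))
            then (bfsLoop n m (gZero st.1 r c) [(r, c)] 0 PySem.Set.empty).2.1 else 0) := by
        rw [hcols]; exact hget2 j hj0
      rw [List.getElem?_eq_getElem hj] at hsome
      rw [Option.some.inj hsome, hdata j hj0, tcount_append]
      congr 1
      rw [tcount_class L n m (j : Int) pl hclassK, a1]
      by_cases hjm : (j : Int) ∈ pl.map Prod.snd
      · rw [if_pos hjm, if_pos (show (j : Int) ∈ PySem.Set.ofList (pl.map (fun p => p.2)) from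
          (PySem.Set.mem_ofList _ _).mpr hjm)]
        ring
      · rw [if_neg hjm, if_neg (show ¬ (j : Int) ∈ PySem.Set.ofList (pl.map (fun p => p.2)) from
          fun hq => hjm ((PySem.Set.mem_ofList _ _).mp hq))]
  · rw [if_neg hg]
    refine ⟨S, hGR, hnd, hliveS, hclosed, ?_, hlen, hdata⟩
    intro y hy hylive
    rcases List.mem_append.mp hy with hy | hy
    · exact hcov y hy hylive
    · rcases List.mem_singleton.mp hy with rfl
      by_contra hyS
      exact hg ((GRel_read hGR hx1 hx3).mpr ⟨hylive.2.2.2.2, hyS⟩)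

-- ===== B-side: the label invariant =====
def AdjP (L : List (List Int)) (n m : Int) (q : List (Int × Int)) (u w : Int × Int) : Prop :=
  u ∈ q ∧ w ∈ q ∧ AdjC L n m u w

def ReachP (L : List (List Int)) (n m : Int) (q : List (Int × Int)) :
    Int × Int → Int × Int → Prop :=
  Relation.ReflTransGen (AdjP L n m q)

def lin (m : Int) (x : Int × Int) : Int := x.1 * m + x.2

def LabInv (L : List (List Int)) (n m : Int) (q : List (Int × Int))
    (d : PySem.Dict (Int × Int) Int) : Prop :=
  d.keys.Nodup ∧
  (∀ x, d.contains x = true ↔ (x ∈ q ∧ LiveC L n m x)) ∧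
  (∀ x v, d.get? x = some v → ∃ z, d.contains z = true ∧ v = lin m z) ∧
  (∀ x y vx vy, d.get? x = some vx → d.get? y = some vy →
    (vx = vy ↔ ReachP L n m q x y))

theorem adjC_ne {L : List (List Int)} {n m : Int} {u w : Int × Int}
    (h : AdjC L n m u w) : u ≠ w := by
  obtain ⟨_, _, hoff⟩ := h
  intro heq
  subst heq
  rcases hoff with ⟨e1, _⟩ | ⟨e1, _⟩ | ⟨_, e2⟩ | ⟨_, e2⟩ <;> omega

theorem adjP_symm {L : List (List Int)} {n m : Int} {q : List (Int × Int)} {u w : Int × Int}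
    (h : AdjP L n m q u w) : AdjP L n m q w u :=
  ⟨h.2.1, h.1, adjC_symm h.2.2⟩

theorem reachP_symm {L : List (List Int)} {n m : Int} {q : List (Int × Int)} {u w : Int × Int}
    (h : ReachP L n m q u w) : ReachP L n m q w u :=
  Relation.ReflTransGen.symmetric (fun _ _ => adjP_symm) h

theorem reachP_mono {L : List (List Int)} {n m : Int} {q : List (Int × Int)} {x : Int × Int}
    {y z : Int × Int} (h : ReachP L n m q y z) : ReachP L n m (q ++ [x]) y z :=
  Relation.ReflTransGen.mono
    (fun _ _ hp => ⟨List.mem_append.mpr (Or.inl hp.1),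
      List.mem_append.mpr (Or.inl hp.2.1), hp.2.2⟩) h

theorem pvLinInj {m r c p q2 : Int} (hc : 0 ≤ c) (hcm : c < m) (hq : 0 ≤ q2) (hqm : q2 < m)
    (h : p * m + q2 = r * m + c) : p = r ∧ q2 = c := by
  have hm : 0 < m := by omega
  rcases lt_trichotomy p r with hpr | hpr | hpr
  · have h2 : (p + 1) * m ≤ r * m :=
      mul_le_mul_of_nonneg_right (by omega) (le_of_lt hm)
    rw [add_mul, one_mul] at h2
    linarith
  · refine ⟨hpr, ?_⟩
    subst hpr
    omega
  · have h2 : (r + 1) * m ≤ p * m :=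
      mul_le_mul_of_nonneg_right (by omega) (le_of_lt hm)
    rw [add_mul, one_mul] at h2
    linarith

theorem relabel_get? (d : PySem.Dict (Int × Int) Int) (b a : Int) (k : Int × Int) :
    (relabel d b a).get? k = (d.get? k).map (fun v => if v = b then a else v) := by
  obtain ⟨items⟩ := d
  induction items with
  | nil => rfl
  | cons p rest ih =>
    obtain ⟨pk, pv⟩ := p
    have hstep : relabel (PySem.Dict.mk ((pk, pv) :: rest)) b a =
        PySem.Dict.mk ((pk, if pv = b then a else pv) ::
          (rest.map (fun p => if p.2 == b then (p.1, a) else p))) := by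
      by_cases hvb : pv = b
      · simp [relabel, hvb]
      · simp [relabel, hvb]
    rw [hstep, PySem.Dict.get?_mk_cons, PySem.Dict.get?_mk_cons]
    by_cases hk : (pk == k) = true
    · rw [if_pos hk, if_pos hk]
      rfl
    · rw [if_neg hk, if_neg hk]
      exact ih

theorem relabel_keys (d : PySem.Dict (Int × Int) Int) (b a : Int) :
    (relabel d b a).keys = d.keys := by
  show (d.items.map _).map Prod.fst = d.items.map Prod.fst
  rw [List.map_map]
  refine List.map_congr_left ?_
  intro p _
  simp only [Function.comp]
  by_cases hvb : p.2 == b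
  · rw [if_pos hvb]
  · rw [if_neg hvb]

theorem relabel_contains (d : PySem.Dict (Int × Int) Int) (b a : Int) (k : Int × Int) :
    (relabel d b a).contains k = d.contains k := by
  rw [PySem.Dict.contains_eq_decide_mem_keys, PySem.Dict.contains_eq_decide_mem_keys,
    relabel_keys]

theorem pvInsertInsert (d : PySem.Dict (Int × Int) Int) (k : Int × Int) (v w : Int) :
    (d.insert k v).insert k w = d.insert k w := by
  apply PySem.Dict.ext
  by_cases hc : d.contains k = true
  · rw [PySem.Dict.items_insert_of_contains _ _ (PySem.Dict.contains_insert_self _ _ _),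
      PySem.Dict.items_insert_of_contains _ _ hc, PySem.Dict.items_insert_of_contains _ _ hc,
      List.map_map]
    refine List.map_congr_left ?_
    intro p _
    simp only [Function.comp]
    by_cases hp : (p.1 == k) = true
    · simp [hp]
    · simp [hp]
  · have hc' : d.contains k = false := by
      rcases hb : d.contains k with _ | _
      · rfl
      · exact absurd hb hc
    rw [PySem.Dict.items_insert_of_contains _ _ (PySem.Dict.contains_insert_self _ _ _),
      PySem.Dict.items_insert_of_not_contains _ _ hc',
      PySem.Dict.items_insert_of_not_contains _ _ hc', List.map_append]
    have hid : d.items.map (fun p => if p.1 == k then (k, w) else p) = d.items := by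
      conv_rhs => rw [← List.map_id d.items]
      refine List.map_congr_left ?_
      intro p hp
      show (if (p.1 == k) = true then (k, w) else p) = p
      rw [if_neg ?_]
      intro hbeq
      have hpk : p.1 = k := by simpa using hbeq
      have : k ∈ d.keys := by
        rw [← hpk]
        exact List.mem_map.mpr ⟨p, hp, rfl⟩
      rw [PySem.Dict.contains_eq_decide_mem_keys] at hc'
      simp [this] at hc'
    rw [hid]
    simp

theorem reachP_ext_fwd (L : List (List Int)) (n m : Int) (q : List (Int × Int)) (x : Int × Int)
    (A : List (Int × Int)) (hA : ∀ u, u ∈ A ↔ (AdjC L n m x u ∧ u ∈ q)) :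
    ∀ y z, ReachP L n m (q ++ [x]) y z →
      ((y ≠ x → z ≠ x → ReachP L n m q y z ∨
        ((∃ a ∈ A, ReachP L n m q y a) ∧ (∃ b ∈ A, ReachP L n m q b z))) ∧
      (y ≠ x → z = x → ∃ a ∈ A, ReachP L n m q y a) ∧
      (y = x → z ≠ x → ∃ b ∈ A, ReachP L n m q b z)) := by
  intro y z h
  induction h with
  | refl =>
    exact ⟨fun _ _ => Or.inl Relation.ReflTransGen.refl,
      fun hy hz => absurd hz hy, fun hy hz => absurd hy hz⟩
  | tail hab hbc ihT =>
    rename_i b' c'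
    obtain ⟨hbP, hcP, hadj⟩ := hbc
    have hbc_ne : b' ≠ c' := adjC_ne hadj
    by_cases hcx : c' = x
    · have hbx : b' ≠ x := fun h => hbc_ne (h.trans hcx.symm)
      rw [hcx] at hadj
      have hbq : b' ∈ q := by
        rcases List.mem_append.mp hbP with h' | h'
        · exact h'
        · rcases List.mem_singleton.mp h' with rfl
          exact absurd rfl hbx
      have hbA : b' ∈ A := (hA b').mpr ⟨adjC_symm hadj, hbq⟩
      refine ⟨fun _ hz => absurd hcx hz, fun hy _ => ?_, fun _ hz => absurd hcx hz⟩
      rcases ihT.1 hy hbx with hr | ⟨⟨a, haA, har⟩, _⟩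
      · exact ⟨b', hbA, hr⟩
      · exact ⟨a, haA, har⟩
    · by_cases hbx : b' = x
      · rw [hbx] at hadj
        have hcq : c' ∈ q := by
          rcases List.mem_append.mp hcP with h' | h'
          · exact h'
          · rcases List.mem_singleton.mp h' with rfl
            exact absurd rfl hcx
        have hcA : c' ∈ A := (hA c').mpr ⟨hadj, hcq⟩
        refine ⟨fun hy _ => ?_, fun _ hz => absurd hz hcx,
          fun _ _ => ⟨c', hcA, Relation.ReflTransGen.refl⟩⟩
        obtain ⟨a, haA, har⟩ := ihT.2.1 hy hbx
        exact Or.inr ⟨⟨a, haA, har⟩, ⟨c', hcA, Relation.ReflTransGen.refl⟩⟩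
      · have hbq : b' ∈ q := by
          rcases List.mem_append.mp hbP with h' | h'
          · exact h'
          · rcases List.mem_singleton.mp h' with rfl
            exact absurd rfl hbx
        have hcq : c' ∈ q := by
          rcases List.mem_append.mp hcP with h' | h'
          · exact h'
          · rcases List.mem_singleton.mp h' with rfl
            exact absurd rfl hcx
        have hedge : AdjP L n m q b' c' := ⟨hbq, hcq, hadj⟩
        refine ⟨fun hy _ => ?_, fun _ hz => absurd hz hcx, fun hy _ => ?_⟩
        · rcases ihT.1 hy hbx with hr | ⟨ha, ⟨b0, hb0A, hb0r⟩⟩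
          · exact Or.inl (Relation.ReflTransGen.tail hr hedge)
          · exact Or.inr ⟨ha, ⟨b0, hb0A, Relation.ReflTransGen.tail hb0r hedge⟩⟩
        · obtain ⟨b0, hb0A, hb0r⟩ := ihT.2.2 hy hbx
          exact ⟨b0, hb0A, Relation.ReflTransGen.tail hb0r hedge⟩

-- anchor list for the cell (r, c): its already-labeled live neighbours (up and left)
def anchors (d : PySem.Dict (Int × Int) Int) (r c : Int) : List (Int × Int) :=
  (if d.contains (r - 1, c) = true then [((r - 1 : Int), c)] else []) ++
    (if d.contains (r, c - 1) = true then [(r, (c - 1 : Int))] else [])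

theorem labinv_shared (L : List (List Int)) (n m : Int) (q : List (Int × Int))
    (r c : Int) (d : PySem.Dict (Int × Int) Int)
    (h : LabInv L n m q d)
    (hxq : (r, c) ∉ q)
    (hqchar : ∀ y, y ∈ q ↔ ((0 ≤ y.1 ∧ y.1 < n ∧ 0 ≤ y.2 ∧ y.2 < m) ∧ scanLt y (r, c)))
    (hxb : 0 ≤ r ∧ r < n ∧ 0 ≤ c ∧ c < m)
    (hg : gRead L r c ≠ 0) :
    (∀ u, u ∈ anchors d r c ↔ (AdjC L n m (r, c) u ∧ u ∈ q)) ∧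
    (∀ y vy, d.get? y = some vy → vy ≠ r * m + c) ∧
    d.contains (r, c) = false := by
  obtain ⟨hknd, hcont, hval, hlab⟩ := h
  obtain ⟨hx1, hx2, hx3, hx4⟩ := hxb
  have hlivex : LiveC L n m (r, c) := ⟨hx1, hx2, hx3, hx4, hg⟩
  have hcx : d.contains (r, c) = false := by
    rcases hb : d.contains (r, c) with _ | _
    · rfl
    · exact absurd ((hcont _).mp hb).1 hxq
  refine ⟨?_, ?_, hcx⟩
  · intro u
    constructor
    · intro hu
      rcases List.mem_append.mp hu with hu | hu
      · by_cases hU : d.contains (r - 1, c) = true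
        · rw [if_pos hU] at hu
          rcases List.mem_singleton.mp hu with rfl
          obtain ⟨huq, hulive⟩ := (hcont _).mp hU
          exact ⟨⟨hlivex, hulive, Or.inl ⟨rfl, rfl⟩⟩, huq⟩
        · rw [if_neg hU] at hu
          exact absurd hu List.not_mem_nil
      · by_cases hLft : d.contains (r, c - 1) = true
        · rw [if_pos hLft] at hu
          rcases List.mem_singleton.mp hu with rfl
          obtain ⟨huq, hulive⟩ := (hcont _).mp hLft
          exact ⟨⟨hlivex, hulive, Or.inr (Or.inr (Or.inl ⟨rfl, rfl⟩))⟩, huq⟩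
        · rw [if_neg hLft] at hu
          exact absurd hu List.not_mem_nil
    · rintro ⟨⟨_, hulive, hoff⟩, huq⟩
      have hscan := ((hqchar u).mp huq).2
      rcases hoff with ⟨e1, e2⟩ | ⟨e1, e2⟩ | ⟨e1, e2⟩ | ⟨e1, e2⟩
      · have hu : u = ((r - 1 : Int), c) := Prod.ext_iff.mpr ⟨e1, e2⟩
        subst hu
        have hU : d.contains (r - 1, c) = true := (hcont _).mpr ⟨huq, hulive⟩
        exact List.mem_append.mpr (Or.inl (by rw [if_pos hU]; exact List.mem_singleton_self _))
      · exfalso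
        rcases hscan with h' | ⟨h', _⟩ <;> omega
      · have hu : u = (r, (c - 1 : Int)) := Prod.ext_iff.mpr ⟨e1, e2⟩
        subst hu
        have hLft : d.contains (r, c - 1) = true := (hcont _).mpr ⟨huq, hulive⟩
        exact List.mem_append.mpr (Or.inr (by rw [if_pos hLft]; exact List.mem_singleton_self _))
      · exfalso
        rcases hscan with h' | ⟨h', _⟩ <;> omega
  · intro y vy hy heq
    obtain ⟨z, hzc, hzl⟩ := hval y vy hy
    obtain ⟨hzq, hzlive⟩ := (hcont _).mp hzc
    obtain ⟨-, -, hz3, hz4, -⟩ := hzlive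
    have hzx : z = (r, c) := by
      obtain ⟨p1, p2⟩ := z
      have hz3' : 0 ≤ p2 := by simpa using hz3
      have hz4' : p2 < m := by simpa using hz4
      -- lin m (p1, p2) = p1 * m + p2 definitionally
      have hlin : p1 * m + p2 = r * m + c := by rw [← heq, hzl]; rfl
      obtain ⟨e1, e2⟩ := pvLinInj hx3 hx4 hz3' hz4' hlin
      rw [e1, e2]
    rw [hzx] at hzq
    exact hxq hzq

theorem labinv_insert_case (L : List (List Int)) (n m : Int) (q : List (Int × Int))
    (r c : Int) (d : PySem.Dict (Int × Int) Int) (bb : Int)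
    (h : LabInv L n m q d)
    (hxq : (r, c) ∉ q)
    (hqchar : ∀ y, y ∈ q ↔ ((0 ≤ y.1 ∧ y.1 < n ∧ 0 ≤ y.2 ∧ y.2 < m) ∧ scanLt y (r, c)))
    (hxb : 0 ≤ r ∧ r < n ∧ 0 ≤ c ∧ c < m)
    (hg : gRead L r c ≠ 0)
    (hbbU : (d.contains (r - 1, c) = true ∧ bb = d.getD (r - 1, c) 0) ∨
            (d.contains (r - 1, c) = false ∧ bb = r * m + c))
    (hnorel : d.contains (r, c - 1) = true → d.getD (r, c - 1) 0 = bb) :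
    LabInv L n m (q ++ [(r, c)]) (d.insert (r, c) bb) := by
  obtain ⟨hA, hfresh, hcx⟩ := labinv_shared L n m q r c d h hxq hqchar hxb hg
  obtain ⟨hknd, hcont, hval, hlab⟩ := h
  obtain ⟨hx1, hx2, hx3, hx4⟩ := hxb
  have hlivex : LiveC L n m (r, c) := ⟨hx1, hx2, hx3, hx4, hg⟩
  have hget_of_contains : ∀ y, d.contains y = true → ∃ v, d.get? y = some v := by
    intro y hy
    rw [PySem.Dict.contains_eq_isSome_get?] at hy
    exact Option.isSome_iff_exists.mp hy
  have hfwd := reachP_ext_fwd L n m q (r, c) (anchors d r c) hA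
  have hanchor : ∀ a ∈ anchors d r c, ReachP L n m (q ++ [(r, c)]) (r, c) a := by
    intro a ha
    exact Relation.ReflTransGen.single
      ⟨List.mem_append.mpr (Or.inr (List.mem_singleton_self _)),
       List.mem_append.mpr (Or.inl ((hA a).mp ha).2), ((hA a).mp ha).1⟩
  have hanchval : ∀ a ∈ anchors d r c, ∃ va, d.get? a = some va ∧ va = bb := by
    intro a ha
    rcases List.mem_append.mp ha with ha' | ha'
    · by_cases hU : d.contains (r - 1, c) = true
      · rw [if_pos hU] at ha'
        rcases List.mem_singleton.mp ha' with rfl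
        obtain ⟨va, hva⟩ := hget_of_contains _ hU
        rcases hbbU with ⟨_, hbbv⟩ | ⟨hUf, _⟩
        · refine ⟨va, hva, ?_⟩
          rw [hbbv, PySem.Dict.getD_eq_get?_getD, hva]
          rfl
        · rw [hU] at hUf
          exact absurd hUf (by simp)
      · rw [if_neg hU] at ha'
        exact absurd ha' List.not_mem_nil
    · by_cases hLft : d.contains (r, c - 1) = true
      · rw [if_pos hLft] at ha'
        rcases List.mem_singleton.mp ha' with rfl
        obtain ⟨va, hva⟩ := hget_of_contains _ hLft
        refine ⟨va, hva, ?_⟩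
        rw [← hnorel hLft, PySem.Dict.getD_eq_get?_getD, hva]
        rfl
      · rw [if_neg hLft] at ha'
        exact absurd ha' List.not_mem_nil
  have hGcont : ∀ y, (d.insert (r, c) bb).contains y = true ↔
      (y = (r, c) ∨ d.contains y = true) := by
    intro y
    rw [PySem.Dict.contains_insert]
    simp [Bool.or_eq_true]
  -- the x-column iff, shared by three of the four label cases
  have hx_iff : ∀ w vw, w ≠ (r, c) → d.get? w = some vw →
      (bb = vw ↔ ReachP L n m (q ++ [(r, c)]) (r, c) w) := by
    intro w vw hwne hw
    constructor
    · intro heq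
      rcases hbbU with ⟨hU, hbbv⟩ | ⟨_, hbbv⟩
      · obtain ⟨vu, hvu⟩ := hget_of_contains _ hU
        have hvu_bb : bb = vu := by
          rw [hbbv, PySem.Dict.getD_eq_get?_getD, hvu]
          rfl
        have hupA : ((r - 1 : Int), c) ∈ anchors d r c :=
          List.mem_append.mpr (Or.inl (by rw [if_pos hU]; exact List.mem_singleton_self _))
        have hr : ReachP L n m q ((r - 1 : Int), c) w :=
          (hlab _ _ _ _ hvu hw).mp (by rw [← hvu_bb, heq])
        exact Relation.ReflTransGen.trans (hanchor _ hupA) (reachP_mono hr)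
      · exact absurd (hbbv ▸ heq).symm (hfresh w vw hw)
    · intro hreach
      obtain ⟨b0, hb0A, hb0r⟩ := (hfwd (r, c) w hreach).2.2 rfl hwne
      obtain ⟨vb, hvb, hvbb⟩ := hanchval b0 hb0A
      have hveq : vb = vw := (hlab _ _ _ _ hvb hw).mpr hb0r
      rw [← hvbb, hveq]
  refine ⟨PySem.Dict.nodup_keys_insert _ _ _ hknd, ?_, ?_, ?_⟩
  · intro y
    rw [hGcont y]
    constructor
    · rintro (rfl | hy)
      · exact ⟨List.mem_append.mpr (Or.inr (List.mem_singleton_self _)), hlivex⟩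
      · obtain ⟨hyq, hylive⟩ := (hcont _).mp hy
        exact ⟨List.mem_append.mpr (Or.inl hyq), hylive⟩
    · rintro ⟨hymem, hylive⟩
      rcases List.mem_append.mp hymem with hy | hy
      · exact Or.inr ((hcont _).mpr ⟨hy, hylive⟩)
      · rcases List.mem_singleton.mp hy with rfl
        exact Or.inl rfl
  · intro y v hy
    by_cases hyx : y = (r, c)
    · rw [hyx, PySem.Dict.get?_insert_self] at hy
      have hv : v = bb := (Option.some.inj hy).symm
      rcases hbbU with ⟨hU, hbbv⟩ | ⟨_, hbbv⟩
      · obtain ⟨vu, hvu⟩ := hget_of_contains _ hU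
        obtain ⟨z, hzc, hzl⟩ := hval _ _ hvu
        refine ⟨z, (hGcont z).mpr (Or.inr hzc), ?_⟩
        rw [hv, hbbv, PySem.Dict.getD_eq_get?_getD, hvu]
        exact hzl
      · refine ⟨(r, c), (hGcont _).mpr (Or.inl rfl), ?_⟩
        rw [hv, hbbv]
        rfl
    · rw [PySem.Dict.get?_insert_of_ne _ _ hyx] at hy
      obtain ⟨z, hzc, hzl⟩ := hval _ _ hy
      exact ⟨z, (hGcont z).mpr (Or.inr hzc), hzl⟩
  · intro y z vy vz hy hz
    by_cases hyx : y = (r, c) <;> by_cases hzx : z = (r, c)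
    · rw [hyx, PySem.Dict.get?_insert_self] at hy
      rw [hzx, PySem.Dict.get?_insert_self] at hz
      rw [← Option.some.inj hy, ← Option.some.inj hz, hyx, hzx]
      exact ⟨fun _ => Relation.ReflTransGen.refl, fun _ => rfl⟩
    · rw [hyx, PySem.Dict.get?_insert_self] at hy
      rw [PySem.Dict.get?_insert_of_ne _ _ hzx] at hz
      rw [← Option.some.inj hy, hyx]
      exact hx_iff z vz hzx hz
    · rw [hzx, PySem.Dict.get?_insert_self] at hz
      rw [PySem.Dict.get?_insert_of_ne _ _ hyx] at hy
      rw [← Option.some.inj hz, hzx]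
      have := hx_iff y vy hyx hy
      constructor
      · intro heq
        exact reachP_symm (this.mp heq.symm)
      · intro hreach
        exact (this.mpr (reachP_symm hreach)).symm
    · rw [PySem.Dict.get?_insert_of_ne _ _ hyx] at hy
      rw [PySem.Dict.get?_insert_of_ne _ _ hzx] at hz
      constructor
      · intro heq
        exact reachP_mono ((hlab _ _ _ _ hy hz).mp heq)
      · intro hreach
        rcases (hfwd y z hreach).1 hyx hzx with hr | ⟨⟨a, haA, har⟩, ⟨b0, hb0A, hb0r⟩⟩
        · exact (hlab _ _ _ _ hy hz).mpr hr
        · obtain ⟨va, hva, hvab⟩ := hanchval a haA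
          obtain ⟨vb, hvb, hvbb⟩ := hanchval b0 hb0A
          have h1 : vy = va := (hlab _ _ _ _ hy hva).mpr har
          have h2 : vb = vz := (hlab _ _ _ _ hvb hz).mpr hb0r
          rw [h1, hvab, ← hvbb, h2]

theorem labinv_relabel_case (L : List (List Int)) (n m : Int) (q : List (Int × Int))
    (r c : Int) (d : PySem.Dict (Int × Int) Int) (bb : Int)
    (h : LabInv L n m q d)
    (hxq : (r, c) ∉ q)
    (hqchar : ∀ y, y ∈ q ↔ ((0 ≤ y.1 ∧ y.1 < n ∧ 0 ≤ y.2 ∧ y.2 < m) ∧ scanLt y (r, c)))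
    (hxb : 0 ≤ r ∧ r < n ∧ 0 ≤ c ∧ c < m)
    (hg : gRead L r c ≠ 0)
    (hbbU : (d.contains (r - 1, c) = true ∧ bb = d.getD (r - 1, c) 0) ∨
            (d.contains (r - 1, c) = false ∧ bb = r * m + c))
    (hLft : d.contains (r, c - 1) = true)
    (hab : d.getD (r, c - 1) 0 ≠ bb) :
    LabInv L n m (q ++ [(r, c)])
      (relabel (d.insert (r, c) bb) bb (d.getD (r, c - 1) 0)) := by
  obtain ⟨hA, hfresh, hcx⟩ := labinv_shared L n m q r c d h hxq hqchar hxb hg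
  obtain ⟨hknd, hcont, hval, hlab⟩ := h
  obtain ⟨hx1, hx2, hx3, hx4⟩ := hxb
  have hlivex : LiveC L n m (r, c) := ⟨hx1, hx2, hx3, hx4, hg⟩
  have hget_of_contains : ∀ y, d.contains y = true → ∃ v, d.get? y = some v := by
    intro y hy
    rw [PySem.Dict.contains_eq_isSome_get?] at hy
    exact Option.isSome_iff_exists.mp hy
  have hfwd := reachP_ext_fwd L n m q (r, c) (anchors d r c) hA
  have hanchor : ∀ a ∈ anchors d r c, ReachP L n m (q ++ [(r, c)]) (r, c) a := by
    intro a ha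
    exact Relation.ReflTransGen.single
      ⟨List.mem_append.mpr (Or.inr (List.mem_singleton_self _)),
       List.mem_append.mpr (Or.inl ((hA a).mp ha).2), ((hA a).mp ha).1⟩
  set aL := d.getD (r, c - 1) 0 with haL
  obtain ⟨vL, hvL⟩ := hget_of_contains _ hLft
  have hvLaL : vL = aL := by
    rw [haL, PySem.Dict.getD_eq_get?_getD, hvL]
    rfl
  have hlefA : (r, (c - 1 : Int)) ∈ anchors d r c :=
    List.mem_append.mpr (Or.inr (by rw [if_pos hLft]; exact List.mem_singleton_self _))
  -- each anchor's label is bb (the up neighbour) or aL (the left neighbour)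
  have hanchval : ∀ a ∈ anchors d r c, ∃ va, d.get? a = some va ∧ (va = bb ∨ va = aL) := by
    intro a ha
    rcases List.mem_append.mp ha with ha' | ha'
    · by_cases hU : d.contains (r - 1, c) = true
      · rw [if_pos hU] at ha'
        rcases List.mem_singleton.mp ha' with rfl
        obtain ⟨va, hva⟩ := hget_of_contains _ hU
        rcases hbbU with ⟨_, hbbv⟩ | ⟨hUf, _⟩
        · refine ⟨va, hva, Or.inl ?_⟩
          rw [hbbv, PySem.Dict.getD_eq_get?_getD, hva]
          rfl
        · rw [hU] at hUf
          exact absurd hUf (by simp)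
      · rw [if_neg hU] at ha'
        exact absurd ha' List.not_mem_nil
    · by_cases hLft' : d.contains (r, c - 1) = true
      · rw [if_pos hLft'] at ha'
        rcases List.mem_singleton.mp ha' with rfl
        exact ⟨vL, hvL, Or.inr hvLaL⟩
      · rw [if_neg hLft'] at ha'
        exact absurd ha' List.not_mem_nil
  -- conversely a key whose label is bb or aL reaches an anchor
  have hanch_of_val : ∀ w vw, d.get? w = some vw → (vw = bb ∨ vw = aL) →
      ∃ a ∈ anchors d r c, ReachP L n m q w a := by
    intro w vw hw hor
    rcases hor with hvw | hvw
    · rcases hbbU with ⟨hU, hbbv⟩ | ⟨_, hbbv⟩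
      · obtain ⟨vu, hvu⟩ := hget_of_contains _ hU
        have hvu_bb : vu = bb := by
          rw [hbbv, PySem.Dict.getD_eq_get?_getD, hvu]
          rfl
        have hupA : ((r - 1 : Int), c) ∈ anchors d r c :=
          List.mem_append.mpr (Or.inl (by rw [if_pos hU]; exact List.mem_singleton_self _))
        refine ⟨_, hupA, reachP_symm ((hlab _ _ _ _ hvu hw).mp (by rw [hvu_bb, hvw]))⟩
      · exact absurd (hbbv ▸ hvw) (hfresh w vw hw)
    · exact ⟨_, hlefA, reachP_symm ((hlab _ _ _ _ hvL hw).mp (by rw [hvLaL, hvw]))⟩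
  have hGcont : ∀ y, (relabel (d.insert (r, c) bb) bb aL).contains y = true ↔
      (y = (r, c) ∨ d.contains y = true) := by
    intro y
    rw [relabel_contains, PySem.Dict.contains_insert]
    simp [Bool.or_eq_true]
  have hDget_ne : ∀ y, y ≠ (r, c) → (relabel (d.insert (r, c) bb) bb aL).get? y =
      (d.get? y).map (fun v => if v = bb then aL else v) := by
    intro y hy
    rw [relabel_get?, PySem.Dict.get?_insert_of_ne _ _ hy]
  have hDget_x : (relabel (d.insert (r, c) bb) bb aL).get? (r, c) = some aL := by
    rw [relabel_get?, PySem.Dict.get?_insert_self]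
    simp
  -- how the collapsing map acts on labels
  have hfv : ∀ vw, (aL = (if vw = bb then aL else vw)) ↔ (vw = bb ∨ vw = aL) := by
    intro vw
    by_cases hv : vw = bb
    · simp [hv]
    · simp [hv, eq_comm]
  -- the x-column iff
  have hx_iff : ∀ w vw, w ≠ (r, c) → d.get? w = some vw →
      ((aL = if vw = bb then aL else vw) ↔ ReachP L n m (q ++ [(r, c)]) (r, c) w) := by
    intro w vw hwne hw
    rw [hfv vw]
    constructor
    · intro hor
      obtain ⟨a, haA, har⟩ := hanch_of_val w vw hw hor
      exact Relation.ReflTransGen.trans (hanchor _ haA) (reachP_mono (reachP_symm har))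
    · intro hreach
      obtain ⟨b0, hb0A, hb0r⟩ := (hfwd (r, c) w hreach).2.2 rfl hwne
      obtain ⟨vb, hvb, hvbb⟩ := hanchval b0 hb0A
      have hveq : vb = vw := (hlab _ _ _ _ hvb hw).mpr hb0r
      rw [← hveq]
      exact hvbb
  refine ⟨?_, ?_, ?_, ?_⟩
  · rw [relabel_keys]
    exact PySem.Dict.nodup_keys_insert _ _ _ hknd
  · intro y
    rw [hGcont y]
    constructor
    · rintro (rfl | hy)
      · exact ⟨List.mem_append.mpr (Or.inr (List.mem_singleton_self _)), hlivex⟩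
      · obtain ⟨hyq, hylive⟩ := (hcont _).mp hy
        exact ⟨List.mem_append.mpr (Or.inl hyq), hylive⟩
    · rintro ⟨hymem, hylive⟩
      rcases List.mem_append.mp hymem with hy | hy
      · exact Or.inr ((hcont _).mpr ⟨hy, hylive⟩)
      · rcases List.mem_singleton.mp hy with rfl
        exact Or.inl rfl
  · intro y v hy
    by_cases hyx : y = (r, c)
    · rw [hyx, hDget_x] at hy
      have hv : v = aL := (Option.some.inj hy).symm
      obtain ⟨zL, hzLc, hzLl⟩ := hval _ _ hvL
      refine ⟨zL, (hGcont zL).mpr (Or.inr hzLc), ?_⟩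
      rw [hv, ← hvLaL]
      exact hzLl
    · rw [hDget_ne y hyx] at hy
      rcases hget : d.get? y with _ | vy
      · rw [hget] at hy
        exact absurd hy (by simp)
      · rw [hget] at hy
        simp only [Option.map_some] at hy
        have hy' := Option.some.inj hy
        obtain ⟨z, hzc, hzl⟩ := hval _ _ hget
        by_cases hvb : vy = bb
        · obtain ⟨zL, hzLc, hzLl⟩ := hval _ _ hvL
          refine ⟨zL, (hGcont zL).mpr (Or.inr hzLc), ?_⟩
          rw [← hy', if_pos hvb, ← hvLaL]
          exact hzLl
        · refine ⟨z, (hGcont z).mpr (Or.inr hzc), ?_⟩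
          rw [← hy', if_neg hvb]
          exact hzl
  · intro y z vy vz hy hz
    by_cases hyx : y = (r, c) <;> by_cases hzx : z = (r, c)
    · rw [hyx, hDget_x] at hy
      rw [hzx, hDget_x] at hz
      rw [← Option.some.inj hy, ← Option.some.inj hz, hyx, hzx]
      exact ⟨fun _ => Relation.ReflTransGen.refl, fun _ => rfl⟩
    · rw [hyx, hDget_x] at hy
      rw [hDget_ne z hzx] at hz
      rcases hget : d.get? z with _ | vz0
      · rw [hget] at hz
        exact absurd hz (by simp)
      · rw [hget] at hz
        simp only [Option.map_some] at hz
        rw [← Option.some.inj hy, ← Option.some.inj hz, hyx]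
        exact hx_iff z vz0 hzx hget
    · rw [hzx, hDget_x] at hz
      rw [hDget_ne y hyx] at hy
      rcases hget : d.get? y with _ | vy0
      · rw [hget] at hy
        exact absurd hy (by simp)
      · rw [hget] at hy
        simp only [Option.map_some] at hy
        rw [← Option.some.inj hy, ← Option.some.inj hz, hzx]
        have := hx_iff y vy0 hyx hget
        constructor
        · intro heq
          exact reachP_symm (this.mp heq.symm)
        · intro hreach
          exact (this.mpr (reachP_symm hreach)).symm
    · rw [hDget_ne y hyx] at hy
      rw [hDget_ne z hzx] at hz
      rcases hgy : d.get? y with _ | vy0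
      · rw [hgy] at hy
        exact absurd hy (by simp)
      rcases hgz : d.get? z with _ | vz0
      · rw [hgz] at hz
        exact absurd hz (by simp)
      rw [hgy] at hy
      rw [hgz] at hz
      simp only [Option.map_some] at hy hz
      rw [← Option.some.inj hy, ← Option.some.inj hz]
      constructor
      · intro heq
        by_cases h1 : vy0 = bb <;> by_cases h2 : vz0 = bb
        · -- both labels were bb: already connected
          exact reachP_mono ((hlab _ _ _ _ hgy hgz).mp (by rw [h1, h2]))
        · -- vy0 = bb, vz0 ≠ bb: heq gives aL = vz0
          rw [if_pos h1, if_neg h2] at heq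
          obtain ⟨a, haA, har⟩ := hanch_of_val y vy0 hgy (Or.inl h1)
          obtain ⟨b0, hb0A, hb0r⟩ := hanch_of_val z vz0 hgz (Or.inr heq.symm)
          exact Relation.ReflTransGen.trans (reachP_mono har)
            (Relation.ReflTransGen.trans (reachP_symm (hanchor _ haA))
              (Relation.ReflTransGen.trans (hanchor _ hb0A) (reachP_mono (reachP_symm hb0r))))
        · rw [if_neg h1, if_pos h2] at heq
          obtain ⟨a, haA, har⟩ := hanch_of_val y vy0 hgy (Or.inr heq)
          obtain ⟨b0, hb0A, hb0r⟩ := hanch_of_val z vz0 hgz (Or.inl h2)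
          exact Relation.ReflTransGen.trans (reachP_mono har)
            (Relation.ReflTransGen.trans (reachP_symm (hanchor _ haA))
              (Relation.ReflTransGen.trans (hanchor _ hb0A) (reachP_mono (reachP_symm hb0r))))
        · rw [if_neg h1, if_neg h2] at heq
          exact reachP_mono ((hlab _ _ _ _ hgy hgz).mp heq)
      · intro hreach
        rcases (hfwd y z hreach).1 hyx hzx with hr | ⟨⟨a, haA, har⟩, ⟨b0, hb0A, hb0r⟩⟩
        · rw [(hlab _ _ _ _ hgy hgz).mpr hr]
        · obtain ⟨va, hva, hvaor⟩ := hanchval a haA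
          obtain ⟨vb, hvb, hvbor⟩ := hanchval b0 hb0A
          have h1 : vy0 = va := (hlab _ _ _ _ hgy hva).mpr har
          have h2 : vb = vz0 := (hlab _ _ _ _ hvb hgz).mpr hb0r
          have hyor : vy0 = bb ∨ vy0 = aL := h1 ▸ hvaor
          have hzor : vz0 = bb ∨ vz0 = aL := h2 ▸ hvbor
          rcases hyor with hy1 | hy1 <;> rcases hzor with hz1 | hz1 <;>
            simp [hy1, hz1, hab]

theorem labStep_preserves (L : List (List Int)) (n m : Int) (q rest : List (Int × Int))
    (x : Int × Int) (d : PySem.Dict (Int × Int) Int)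
    (hsplit : scanList n m = q ++ x :: rest) (h : LabInv L n m q d) :
    LabInv L n m (q ++ [x]) (labStep L m d x.1 x.2) := by
  obtain ⟨hxb, hxq, hqchar⟩ := scan_split hsplit
  obtain ⟨r, c⟩ := x
  obtain ⟨hknd, hcont, hval, hlab⟩ := h
  show LabInv L n m (q ++ [(r, c)]) (labStep L m d r c)
  unfold labStep
  by_cases hg : gRead L r c ≠ 0
  · rw [if_pos hg]
    have hup_ne : ((r - 1 : Int), c) ≠ (r, c) := by
      intro hh
      have h' : r - 1 = r := congrArg Prod.fst hh
      omega
    have hlef_ne : (r, (c - 1 : Int)) ≠ (r, c) := by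
      intro hh
      have h' : c - 1 = c := congrArg Prod.snd hh
      omega
    have h1 : (d.insert (r, c) (r * m + c)).contains (r - 1, c) = d.contains (r - 1, c) := by
      rw [PySem.Dict.contains_insert]
      rw [beq_eq_false_iff_ne.mpr hup_ne, Bool.false_or]
    have h2 : (d.insert (r, c) (r * m + c)).getD (r - 1, c) 0 = d.getD (r - 1, c) 0 :=
      PySem.Dict.getD_insert_of_ne _ _ _ hup_ne
    unfold labUp
    rw [h1, h2]
    by_cases hU : d.contains (r - 1, c) = true
    · rw [if_pos hU, pvInsertInsert]
      have h3 : (d.insert (r, c) (d.getD (r - 1, c) 0)).contains (r, c - 1) =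
          d.contains (r, c - 1) := by
        rw [PySem.Dict.contains_insert]
        rw [beq_eq_false_iff_ne.mpr hlef_ne, Bool.false_or]
      have h4 : (d.insert (r, c) (d.getD (r - 1, c) 0)).getD (r, c - 1) 0 =
          d.getD (r, c - 1) 0 := PySem.Dict.getD_insert_of_ne _ _ _ hlef_ne
      have h5 : (d.insert (r, c) (d.getD (r - 1, c) 0)).getD (r, c) 0 = d.getD (r - 1, c) 0 :=
        PySem.Dict.getD_insert_self _ _ _ _
      unfold labLeft
      rw [h3, h4, h5]
      by_cases hLft : d.contains (r, c - 1) = true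
      · rw [if_pos hLft]
        by_cases hab : d.getD (r, c - 1) 0 ≠ d.getD (r - 1, c) 0
        · rw [if_pos hab]
          exact labinv_relabel_case L n m q r c d _ ⟨hknd, hcont, hval, hlab⟩ hxq hqchar hxb hg
            (Or.inl ⟨hU, rfl⟩) hLft hab
        · rw [if_neg hab]
          rw [not_not] at hab
          exact labinv_insert_case L n m q r c d _ ⟨hknd, hcont, hval, hlab⟩ hxq hqchar hxb hg
            (Or.inl ⟨hU, rfl⟩) (fun _ => hab)
      · have hLft' : d.contains (r, c - 1) = false := by
          rcases hb : d.contains (r, c - 1) with _ | _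
          · rfl
          · exact absurd hb hLft
        rw [if_neg (by rw [hLft']; exact Bool.false_ne_true)]
        exact labinv_insert_case L n m q r c d _ ⟨hknd, hcont, hval, hlab⟩ hxq hqchar hxb hg
          (Or.inl ⟨hU, rfl⟩) (fun hh => absurd hh (by rw [hLft']; exact Bool.false_ne_true))
    · have hU' : d.contains (r - 1, c) = false := by
        rcases hb : d.contains (r - 1, c) with _ | _
        · rfl
        · exact absurd hb hU
      rw [if_neg (by rw [hU']; exact Bool.false_ne_true)]
      unfold labLeft
      have h3 : (d.insert (r, c) (r * m + c)).contains (r, c - 1) = d.contains (r, c - 1) := by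
        rw [PySem.Dict.contains_insert]
        rw [beq_eq_false_iff_ne.mpr hlef_ne, Bool.false_or]
      have h4 : (d.insert (r, c) (r * m + c)).getD (r, c - 1) 0 = d.getD (r, c - 1) 0 :=
        PySem.Dict.getD_insert_of_ne _ _ _ hlef_ne
      have h5 : (d.insert (r, c) (r * m + c)).getD (r, c) 0 = r * m + c :=
        PySem.Dict.getD_insert_self _ _ _ _
      rw [h3, h4, h5]
      by_cases hLft : d.contains (r, c - 1) = true
      · rw [if_pos hLft]
        by_cases hab : d.getD (r, c - 1) 0 ≠ r * m + c
        · rw [if_pos hab]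
          exact labinv_relabel_case L n m q r c d _ ⟨hknd, hcont, hval, hlab⟩ hxq hqchar hxb hg
            (Or.inr ⟨hU', rfl⟩) hLft hab
        · rw [if_neg hab]
          rw [not_not] at hab
          exact labinv_insert_case L n m q r c d _ ⟨hknd, hcont, hval, hlab⟩ hxq hqchar hxb hg
            (Or.inr ⟨hU', rfl⟩) (fun _ => hab)
      · have hLft' : d.contains (r, c - 1) = false := by
          rcases hb : d.contains (r, c - 1) with _ | _
          · rfl
          · exact absurd hb hLft
        rw [if_neg (by rw [hLft']; exact Bool.false_ne_true)]
        exact labinv_insert_case L n m q r c d _ ⟨hknd, hcont, hval, hlab⟩ hxq hqchar hxb hg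
          (Or.inr ⟨hU', rfl⟩) (fun hh => absurd hh (by rw [hLft']; exact Bool.false_ne_true))
  · rw [if_neg hg]
    refine ⟨hknd, ?_, hval, ?_⟩
    · intro y
      rw [hcont y]
      constructor
      · rintro ⟨hyq, hylive⟩
        exact ⟨List.mem_append.mpr (Or.inl hyq), hylive⟩
      · rintro ⟨hymem, hylive⟩
        rcases List.mem_append.mp hymem with hy | hy
        · exact ⟨hy, hylive⟩
        · rcases List.mem_singleton.mp hy with rfl
          exact absurd hylive.2.2.2.2 hg
    · intro y z vy vz hy hz
      rw [hlab y z vy vz hy hz]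
      have hA0 : ∀ u, u ∈ ([] : List (Int × Int)) ↔ (AdjC L n m (r, c) u ∧ u ∈ q) := by
        intro u
        constructor
        · intro hu
          exact absurd hu List.not_mem_nil
        · rintro ⟨hadj, _⟩
          exact absurd hadj.1.2.2.2.2 hg
      have hyq : y ∈ q := ((hcont y).mp (by
        rw [PySem.Dict.contains_eq_isSome_get?, hy]; rfl)).1
      have hzq : z ∈ q := ((hcont z).mp (by
        rw [PySem.Dict.contains_eq_isSome_get?, hz]; rfl)).1
      have hyx : y ≠ (r, c) := fun hh => hxq (hh ▸ hyq)
      have hzx : z ≠ (r, c) := fun hh => hxq (hh ▸ hzq)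
      constructor
      · exact reachP_mono
      · intro hreach
        rcases (reachP_ext_fwd L n m q (r, c) [] hA0 y z hreach).1 hyx hzx with hr | ⟨⟨a, ha, _⟩, _⟩
        · exact hr
        · exact absurd ha List.not_mem_nil

-- ===== B-side: grouping and data passes =====
def specGroups (l : List ((Int × Int) × Int)) : PySem.Dict Int (Int × PySem.Set Int) :=
  PySem.Dict.mk ((PySem.Set.ofList (l.map (fun p => p.2))).map (fun v =>
    (v, (((l.filter (fun p => p.2 == v)).length : Int),
      PySem.Set.ofList ((l.filter (fun p => p.2 == v)).map (fun p => p.1.2))))))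

theorem grp_fold_eq (l : List ((Int × Int) × Int)) :
    l.foldl grpStep PySem.Dict.empty = specGroups l := by
  induction l using List.reverseRecOn with
  | nil => rfl
  | append_singleton t p ih =>
    rw [List.foldl_append, List.foldl_cons, List.foldl_nil, ih]
    have hkeys : (specGroups t).keys = PySem.Set.ofList (t.map (fun q => q.2)) := by
      show ((PySem.Set.ofList (t.map (fun q => q.2))).map _).map Prod.fst =
        PySem.Set.ofList (t.map (fun q => q.2))
      rw [List.map_map]
      exact List.map_id _
    have hknd : (specGroups t).keys.Nodup := by
      rw [hkeys]; exact PySem.Set.nodup_ofList _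
    have hitems : (specGroups t).items =
        (PySem.Set.ofList (t.map (fun q => q.2))).map (fun v =>
          (v, (((t.filter (fun q => q.2 == v)).length : Int),
            PySem.Set.ofList ((t.filter (fun q => q.2 == v)).map (fun q => q.1.2))))) := rfl
    have hfilter : ∀ v : Int, (t ++ [p]).filter (fun q => q.2 == v) =
        t.filter (fun q => q.2 == v) ++ (if p.2 = v then [p] else []) := by
      intro v
      rw [List.filter_append]
      by_cases hv : p.2 = v
      · simp [hv]
      · simp [hv]
    by_cases hc : p.2 ∈ t.map (fun q => q.2)
    · -- the label is already a key of groups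
      have hcont : (specGroups t).contains p.2 = true := by
        rw [PySem.Dict.contains_iff_mem_keys, hkeys, PySem.Set.mem_ofList]
        exact hc
      have hlabs : PySem.Set.ofList ((t ++ [p]).map (fun q => q.2)) =
          PySem.Set.ofList (t.map (fun q => q.2)) := by
        rw [List.map_append, List.map_singleton, PySem.Set.ofList_append_singleton]
        exact PySem.Set.add_of_mem (by rw [PySem.Set.mem_ofList]; exact hc)
      have hmemit : (p.2, (((t.filter (fun q => q.2 == p.2)).length : Int),
          PySem.Set.ofList ((t.filter (fun q => q.2 == p.2)).map (fun q => q.1.2)))) ∈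
          (specGroups t).items := by
        rw [hitems]
        exact List.mem_map.mpr ⟨p.2, by rw [PySem.Set.mem_ofList]; exact hc, rfl⟩
      have hgetD : (specGroups t).getD p.2 (0, PySem.Set.empty) =
          (((t.filter (fun q => q.2 == p.2)).length : Int),
            PySem.Set.ofList ((t.filter (fun q => q.2 == p.2)).map (fun q => q.1.2))) :=
        PySem.Dict.getD_of_mem_items _ hmemit hknd _
      simp only [grpStep]
      rw [if_pos hcont, hgetD]
      apply PySem.Dict.ext
      rw [PySem.Dict.items_insert_of_contains _ _ hcont]
      show ((specGroups t).items.map _) = (specGroups (t ++ [p])).items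
      rw [hitems]
      show _ = (PySem.Set.ofList ((t ++ [p]).map (fun q => q.2))).map _
      rw [hlabs, List.map_map]
      refine List.map_congr_left ?_
      intro v hv
      simp only [Function.comp]
      by_cases hveq : v = p.2
      · subst hveq
        rw [if_pos (by simp)]
        rw [hfilter p.2, if_pos rfl]
        simp only [List.length_append, List.length_cons, List.length_nil, List.map_append,
          List.map_cons, List.map_nil, PySem.Set.ofList_append_singleton, Prod.mk.injEq]
        refine ⟨trivial, ?_, trivial⟩
        push_cast
        ring
      · rw [if_neg (by simpa using hveq)]
        have hne : (if p.2 = v then [p] else ([] : List ((Int × Int) × Int))) = [] :=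
          if_neg (fun h => hveq h.symm)
        simp only [hfilter v, hne, List.append_nil]
    · -- fresh label: a new entry is appended
      have hcont : (specGroups t).contains p.2 = false := by
        rw [← Bool.not_eq_true, PySem.Dict.contains_iff_mem_keys, hkeys, PySem.Set.mem_ofList]
        exact hc
      have hlabs : PySem.Set.ofList ((t ++ [p]).map (fun q => q.2)) =
          PySem.Set.ofList (t.map (fun q => q.2)) ++ [p.2] := by
        rw [List.map_append, List.map_singleton, PySem.Set.ofList_append_singleton]
        exact PySem.Set.add_of_not_mem (by rw [PySem.Set.mem_ofList]; exact hc)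
      have hfe : t.filter (fun q => q.2 == p.2) = [] := by
        rw [List.filter_eq_nil_iff]
        intro q hq hbeq
        exact hc (List.mem_map.mpr ⟨q, hq, by simpa using hbeq⟩)
      have hgetD : ((specGroups t).insert p.2 (0, PySem.Set.empty)).getD p.2
          (0, PySem.Set.empty) = (0, PySem.Set.empty) := PySem.Dict.getD_insert_self _ _ _ _
      simp only [grpStep]
      rw [if_neg (by rw [hcont]; exact Bool.false_ne_true), hgetD]
      apply PySem.Dict.ext
      rw [PySem.Dict.items_insert_of_contains _ _ (PySem.Dict.contains_insert_self _ _ _),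
        PySem.Dict.items_insert_of_not_contains _ _ hcont]
      rw [List.map_append]
      show _ = (specGroups (t ++ [p])).items
      have hrhs : (specGroups (t ++ [p])).items =
          (PySem.Set.ofList (t.map (fun q => q.2))).map (fun v =>
            (v, ((((t ++ [p]).filter (fun q => q.2 == v)).length : Int),
              PySem.Set.ofList (((t ++ [p]).filter (fun q => q.2 == v)).map (fun q => q.1.2))))) ++
          [(p.2, ((((t ++ [p]).filter (fun q => q.2 == p.2)).length : Int),
            PySem.Set.ofList (((t ++ [p]).filter (fun q => q.2 == p.2)).map (fun q => q.1.2))))] := by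
        show (PySem.Set.ofList ((t ++ [p]).map (fun q => q.2))).map _ = _
        rw [hlabs, List.map_append, List.map_singleton]
      rw [hrhs]
      congr 1
      · rw [hitems, List.map_map]
        refine List.map_congr_left ?_
        intro v hv
        have hvne : v ≠ p.2 := by
          intro hveq
          exact hc ((PySem.Set.mem_ofList _ _).mp (hveq ▸ hv))
        simp only [Function.comp]
        rw [if_neg (by simpa using hvne)]
        have hne : (if p.2 = v then [p] else ([] : List ((Int × Int) × Int))) = [] :=
          if_neg (fun h => hvne h.symm)
        simp only [hfilter v, hne, List.append_nil]
      · have h1 : PySem.Set.add PySem.Set.empty p.1.2 = [p.1.2] := rfl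
        simp only [hfilter p.2, hfe, List.nil_append, List.map_cons, List.map_nil, h1]
        norm_num
        rfl

theorem data_entries (gs : List (Int × PySem.Set Int))
    (hnd : ∀ pr ∈ gs, pr.2.Nodup) (hnn : ∀ pr ∈ gs, ∀ c ∈ pr.2, 0 ≤ c) (d : List Int) :
    (gs.foldl addGroup d).length = d.length ∧
    ∀ (j : Nat) (hj : j < d.length),
      (gs.foldl addGroup d)[j]? =
        some (d[j]'hj + (gs.map (fun pr => if (j : Int) ∈ pr.2 then pr.1 else 0)).sum) := by
  induction gs generalizing d with
  | nil =>
    refine ⟨rfl, ?_⟩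
    intro j hj
    simp [List.getElem?_eq_getElem hj]
  | cons pr t ih =>
    obtain ⟨hlen, hget⟩ := pvFoldIncrGet pr.1 pr.2 d (hnd pr List.mem_cons_self)
      (hnn pr List.mem_cons_self)
    have hAG : addGroup d pr =
        pr.2.foldl (fun d col => PySem.List.pySetD d col (PySem.List.pyGetD d col 0 + pr.1)) d :=
      rfl
    obtain ⟨ihlen, ihget⟩ := ih (fun p hp => hnd p (List.mem_cons_of_mem _ hp))
      (fun p hp => hnn p (List.mem_cons_of_mem _ hp)) (addGroup d pr)
    have hAGlen : (addGroup d pr).length = d.length := by rw [hAG]; exact hlen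
    constructor
    · rw [List.foldl_cons, ihlen, hAGlen]
    · intro j hj
      rw [List.foldl_cons]
      have hj' : j < (addGroup d pr).length := by rw [hAGlen]; exact hj
      rw [ihget j hj']
      have hsome : (addGroup d pr)[j]? =
          some (d[j]'hj + if (j : Int) ∈ pr.2 then pr.1 else 0) := by
        rw [hAG]; exact hget j hj
      have hval : (addGroup d pr)[j]'hj' =
          d[j]'hj + if (j : Int) ∈ pr.2 then pr.1 else 0 := by
        have := List.getElem?_eq_getElem hj'
        rw [this] at hsome
        exact Option.some.inj hsome
      rw [hval]
      simp only [List.map_cons, List.sum_cons]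
      ring_nf

theorem tcount_flat (L : List (List Int)) (n m j : Int) (f : Int → List (Int × Int)) :
    ∀ labs : List Int,
      ((labs.map (fun v => tcount L n m j (f v))).sum = tcount L n m j (labs.flatMap f)) := by
  intro labs
  induction labs with
  | nil => simp [tcount_nil]
  | cons v t ih =>
    rw [List.map_cons, List.sum_cons, List.flatMap_cons, tcount_append, ih]

-- ===== final assembly =====
theorem pvSolutionEq (land : List (List Int)) (_hpre : Pre_solution land) :
    solution land = solution_alt land := by
  unfold solution solution_alt
  dsimp only
  apply congrArg (fun t : List Int => (PySem.List.max? t (fun x => x)).getD 0)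
  rw [nested_foldl_eq_scan (fun st r c => cellA (PySem.List.len land)
    (PySem.List.len ((PySem.List.pyGet? land 0).getD [])) st r c),
    nested_foldl_eq_scan (fun d r c => labStep land
      (PySem.List.len ((PySem.List.pyGet? land 0).getD [])) d r c), grp_fold_eq]
  set n' : Int := PySem.List.len land with hn'
  set m' : Int := PySem.List.len ((PySem.List.pyGet? land 0).getD []) with hm'
  set dF := (scanList n' m').foldl (fun d p => labStep land m' d p.1 p.2) PySem.Dict.empty
    with hdFdef
  set stA := (scanList n' m').foldl (fun st p => cellA n' m' st p.1 p.2)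
    (land, PySem.List.pyRepeat [0] m') with hstAdef
  -- A-side invariant at the end of the scan
  have hInvA : InvA land n' m' (scanList n' m') stA := by
    rw [hstAdef]
    refine foldl_prefix_inv _ (InvA land n' m') (scanList n' m') (scanList n' m') [] _
      rfl ?_ ?_
    · refine ⟨[], ?_, List.nodup_nil, ?_, ?_, ?_, ?_, ?_⟩
      · intro r c _ _
        exact ⟨fun hf => absurd hf List.not_mem_nil, fun _ => rfl⟩
      · intro y hy
        exact absurd hy List.not_mem_nil
      · intro y hy
        exact absurd hy List.not_mem_nil
      · intro y hy
        exact absurd hy List.not_mem_nil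
      · rw [PySem.List.pyRepeat_singleton]
        exact List.length_replicate
      · intro j hj
        have hjlen : j < (PySem.List.pyRepeat [0] (PySem.List.len
            ((PySem.List.pyGet? land 0).getD [])) : List Int).length := hj
        have h0 : (PySem.List.pyRepeat [0] (PySem.List.len
            ((PySem.List.pyGet? land 0).getD [])) : List Int)[j]? = some 0 := by
          rw [PySem.List.pyRepeat_singleton, List.getElem?_replicate,
            if_pos (by rw [PySem.List.pyRepeat_singleton, List.length_replicate] at hjlen
                       exact hjlen)]
        rw [List.getElem?_eq_getElem hjlen] at h0
        rw [tcount_nil]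
        exact Option.some.inj h0
    · intro q x rest a' hsp hR
      exact cellA_preserves land n' m' q rest x a' hsp hR
  -- B-side invariant at the end of the scan
  have hInvB : LabInv land n' m' (scanList n' m') dF := by
    rw [hdFdef]
    refine foldl_prefix_inv _ (LabInv land n' m') (scanList n' m') (scanList n' m') [] _
      rfl ?_ ?_
    · refine ⟨PySem.Dict.nodup_keys_empty, ?_, ?_, ?_⟩
      · intro y
        rw [PySem.Dict.contains_empty]
        simp
      · intro y v hy
        rw [PySem.Dict.get?_empty] at hy
        exact absurd hy (by simp)
      · intro y z vy vz hy _
        rw [PySem.Dict.get?_empty] at hy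
        exact absurd hy (by simp)
    · intro q x rest a' hsp hR
      exact labStep_preserves land n' m' q rest x a' hsp hR
  obtain ⟨S, hGR, hndS, hliveS, hclosedS, hcovS, hlenA, hdataA⟩ := hInvA
  obtain ⟨hkndF, hcontF, hvalF, hlabF⟩ := hInvB
  -- ReachP over the full scan list is plain reachability
  have hPC : ∀ y z, ReachP land n' m' (scanList n' m') y z ↔ ReachC land n' m' y z := by
    intro y z
    constructor
    · exact Relation.ReflTransGen.mono (fun _ _ hp => hp.2.2)
    · refine Relation.ReflTransGen.mono (fun u w hadj => ?_)
      exact ⟨(mem_scanList n' m' u).mpr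
          ⟨hadj.1.1, hadj.1.2.1, hadj.1.2.2.1, hadj.1.2.2.2.1⟩,
        (mem_scanList n' m' w).mpr
          ⟨hadj.2.1.1, hadj.2.1.2.1, hadj.2.1.2.2.1, hadj.2.1.2.2.2.1⟩, hadj⟩
  -- S holds exactly the live cells
  have hSmem : ∀ y, y ∈ S ↔ LiveC land n' m' y := by
    intro y
    constructor
    · exact hliveS y
    · intro hy
      exact hcovS y ((mem_scanList n' m' y).mpr ⟨hy.1, hy.2.1, hy.2.2.1, hy.2.2.2.1⟩) hy
  -- items of the final label dict
  have hgetiff : ∀ y v, dF.get? y = some v ↔ (y, v) ∈ dF.items :=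
    fun y v => PySem.Dict.get?_eq_some_iff_mem_items _ _ _ hkndF
  have hlive_of_get : ∀ y v, dF.get? y = some v → LiveC land n' m' y := by
    intro y v hy
    have hc : dF.contains y = true := by
      rw [PySem.Dict.contains_eq_isSome_get?, hy]
      rfl
    exact ((hcontF y).mp hc).2
  have hget_of_live : ∀ y, LiveC land n' m' y → ∃ v, dF.get? y = some v := by
    intro y hy
    have hc : dF.contains y = true := (hcontF y).mpr
      ⟨(mem_scanList n' m' y).mpr ⟨hy.1, hy.2.1, hy.2.2.1, hy.2.2.2.1⟩, hy⟩
    rw [PySem.Dict.contains_eq_isSome_get?] at hc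
    exact Option.isSome_iff_exists.mp hc
  -- the per-label cell classes
  have hKv_mem : ∀ (v : Int) (y : Int × Int),
      (y ∈ (dF.items.filter (fun p => p.2 == v)).map (fun p => p.1)) ↔
        dF.get? y = some v := by
    intro v y
    constructor
    · intro hy
      obtain ⟨p, hp, hpe⟩ := List.mem_map.mp hy
      obtain ⟨hpl, hpv⟩ := List.mem_filter.mp hp
      have hv : p.2 = v := by simpa using hpv
      rw [hgetiff]
      have : p = (y, v) := Prod.ext_iff.mpr ⟨hpe, hv⟩
      rw [← this]
      exact hpl
    · intro hy
      refine List.mem_map.mpr ⟨(y, v), List.mem_filter.mpr ⟨(hgetiff y v).mp hy, by simp⟩, rfl⟩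
  have hclassKv : ∀ v : Int, classClosed land n' m'
      ((dF.items.filter (fun p => p.2 == v)).map (fun p => p.1)) := by
    intro v y hy z
    rw [hKv_mem] at hy ⊢
    constructor
    · intro hz
      exact (hPC y z).mp ((hlabF y z v v hy hz).mp rfl)
    · intro hz
      obtain ⟨vz, hvz⟩ := hget_of_live z (pvReachLive (hlive_of_get y v hy) hz)
      have : v = vz := (hlabF y z v vz hy hvz).mpr ((hPC y z).mpr hz)
      rw [← this] at hvz
      exact hvz
  -- the flattened classes are a permutation of S
  have hfst_inj : ∀ p ∈ dF.items, ∀ p' ∈ dF.items, p.1 = p'.1 → p = p' := by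
    have hnd : dF.items.Nodup := List.Nodup.of_map _ hkndF
    exact (List.nodup_map_iff_inj_on hnd).mp hkndF
  have hKv_nodup : ∀ v : Int,
      ((dF.items.filter (fun p => p.2 == v)).map (fun p => p.1)).Nodup := by
    intro v
    have hnd : dF.items.Nodup := List.Nodup.of_map _ hkndF
    have hndf : (dF.items.filter (fun p => p.2 == v)).Nodup := hnd.filter _
    rw [List.nodup_map_iff_inj_on hndf]
    intro p hp p' hp' hpe
    exact hfst_inj p (List.mem_filter.mp hp).1 p' (List.mem_filter.mp hp').1 hpe
  have hFK_nodup : ((PySem.Set.ofList (dF.items.map (fun p => p.2))).flatMap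
      (fun v => (dF.items.filter (fun p => p.2 == v)).map (fun p => p.1))).Nodup := by
    rw [List.flatMap_def, List.nodup_flatten]
    constructor
    · intro lv hlv
      obtain ⟨v, _, rfl⟩ := List.mem_map.mp hlv
      exact hKv_nodup v
    · rw [List.pairwise_map]
      have hlabnd : (PySem.Set.ofList (dF.items.map (fun p => p.2))).Nodup :=
        PySem.Set.nodup_ofList _
      refine hlabnd.imp_of_mem ?_
      intro v v' _ _ hvv y hy hy'
      rw [hKv_mem] at hy hy'
      rw [hy] at hy'
      exact hvv (Option.some.inj hy')
  have hFK_mem : ∀ y, (y ∈ (PySem.Set.ofList (dF.items.map (fun p => p.2))).flatMap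
      (fun v => (dF.items.filter (fun p => p.2 == v)).map (fun p => p.1))) ↔
      LiveC land n' m' y := by
    intro y
    rw [List.mem_flatMap]
    constructor
    · rintro ⟨v, _, hy⟩
      exact hlive_of_get y v ((hKv_mem v y).mp hy)
    · intro hy
      obtain ⟨v, hv⟩ := hget_of_live y hy
      refine ⟨v, ?_, (hKv_mem v y).mpr hv⟩
      rw [PySem.Set.mem_ofList]
      exact List.mem_map.mpr ⟨(y, v), (hgetiff y v).mp hv, rfl⟩
  have hperm : ((PySem.Set.ofList (dF.items.map (fun p => p.2))).flatMap
      (fun v => (dF.items.filter (fun p => p.2 == v)).map (fun p => p.1))).Perm S := by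
    rw [List.perm_ext_iff_of_nodup hFK_nodup hndS]
    intro y
    rw [hFK_mem y, hSmem y]
  -- B's group values
  have hvals : (specGroups dF.items).values =
      (PySem.Set.ofList (dF.items.map (fun p => p.2))).map (fun v =>
        (((dF.items.filter (fun p => p.2 == v)).length : Int),
          PySem.Set.ofList ((dF.items.filter (fun p => p.2 == v)).map (fun p => p.1.2)))) := by
    show ((PySem.Set.ofList _).map _).map Prod.snd = _
    rw [List.map_map]
    rfl
  rw [hvals]
  obtain ⟨hlenB, hdataB⟩ := data_entries
    ((PySem.Set.ofList (dF.items.map (fun p => p.2))).map (fun v =>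
      (((dF.items.filter (fun p => p.2 == v)).length : Int),
        PySem.Set.ofList ((dF.items.filter (fun p => p.2 == v)).map (fun p => p.1.2)))))
    (by
      intro pr hpr
      obtain ⟨v, _, rfl⟩ := List.mem_map.mp hpr
      exact PySem.Set.nodup_ofList _)
    (by
      intro pr hpr col hcol
      obtain ⟨v, _, rfl⟩ := List.mem_map.mp hpr
      rw [PySem.Set.mem_ofList] at hcol
      obtain ⟨p, hp, rfl⟩ := List.mem_map.mp hcol
      have hpl := (List.mem_filter.mp hp).1
      have hlive : LiveC land n' m' p.1 :=
        hlive_of_get p.1 p.2 ((hgetiff p.1 p.2).mpr hpl)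
      exact hlive.2.2.1)
    (PySem.List.pyRepeat [0] m')
  -- both data arrays agree entrywise
  have hlen0 : (PySem.List.pyRepeat [0] m' : List Int).length = m'.toNat := by
    rw [PySem.List.pyRepeat_singleton]
    exact List.length_replicate
  apply List.ext_getElem?
  intro j
  by_cases hj : j < m'.toNat
  · have hjA : j < stA.2.length := by rw [hlenA]; exact hj
    have hjB : j < (PySem.List.pyRepeat [0] m' : List Int).length := by
      rw [hlen0]; exact hj
    rw [List.getElem?_eq_getElem hjA, hdataA j hjA, hdataB j hjB]
    have hz0 : (PySem.List.pyRepeat [0] m' : List Int)[j]'hjB = 0 := by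
      have h0 : (PySem.List.pyRepeat [0] m' : List Int)[j]? = some 0 := by
        rw [PySem.List.pyRepeat_singleton, List.getElem?_replicate, if_pos hj]
      rw [List.getElem?_eq_getElem hjB] at h0
      exact Option.some.inj h0
    rw [hz0]
    congr 1
    rw [List.map_map]
    have hcongr : ∀ v ∈ PySem.Set.ofList (dF.items.map (fun p => p.2)),
        ((fun pr : Int × PySem.Set Int => if (j : Int) ∈ pr.2 then pr.1 else 0) ∘ (fun v =>
          (((dF.items.filter (fun p => p.2 == v)).length : Int),
            PySem.Set.ofList ((dF.items.filter (fun p => p.2 == v)).map (fun p => p.1.2))))) v =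
        tcount land n' m' (j : Int)
          ((dF.items.filter (fun p => p.2 == v)).map (fun p => p.1)) := by
      intro v _
      simp only [Function.comp]
      rw [tcount_class land n' m' (j : Int) _ (hclassKv v)]
      have hmm : ((j : Int) ∈ PySem.Set.ofList
          ((dF.items.filter (fun p => p.2 == v)).map (fun p => p.1.2))) ↔
          ((j : Int) ∈ ((dF.items.filter (fun p => p.2 == v)).map (fun p => p.1)).map
            Prod.snd) := by
        rw [PySem.Set.mem_ofList, List.map_map]
        rfl
      have hlenKv : ((dF.items.filter (fun p => p.2 == v)).map (fun p => p.1)).length =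
          (dF.items.filter (fun p => p.2 == v)).length := List.length_map ..
      by_cases hjm : (j : Int) ∈ PySem.Set.ofList
          ((dF.items.filter (fun p => p.2 == v)).map (fun p => p.1.2))
      · rw [if_pos hjm, if_pos (hmm.mp hjm), hlenKv]
      · rw [if_neg hjm, if_neg (fun hq => hjm (hmm.mpr hq))]
    rw [List.map_congr_left hcongr, tcount_flat]
    rw [tcount_perm land n' m' (j : Int) hperm]
    ring
  · rw [List.getElem?_eq_none, List.getElem?_eq_none]
    · rw [hlenB, hlen0]
      omega
    · rw [hlenA]
      omega

-- ===== VERDICT (by name: the statement is the Claim_ definition above) =====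
theorem solution_spec : Claim_equal_solution := by
  intro land _ hpre
  show solution land = solution_alt land
  exact pvSolutionEq land hpre
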